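-- pv_equiv track=rewrite | github.com/kdh610/CodingTest | 프로그래머스/2/388353. 지게차와 크레인/지게차와 크레인.py | solution
-- ===== SOURCE A (Python) =====
-- from collections import defaultdict, deque
--
-- def solution(storage, requests):
--     n = len(storage)
--     m = len(storage[0])
--
--     # 1. 초기화
--     # storage를 수정 가능한 리스트의 리스트로 변환
--     grid = [list(row) for row in storage]
--
--     # 아이템 종류별 위치 저장 (조회를 빠르게 하기 위함)
--     item_locations = defaultdict(set)
--     for r in range(n):
--         for c in range(m):
--             item_locations[grid[r][c]].add((r, c))
--
--     # 남은 컨테이너 수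
--     remaining_items = n * m
--
--     # '접근 가능한 빈 공간'을 추적하는 배열
--     accessible_empty = [[False] * m for _ in range(n)]
--
--     # 방향 벡터 (상, 하, 좌, 우)
--     dy = [-1, 1, 0, 0]
--     dx = [0, 0, -1, 1]
--
--     def forklift(y, x):
--
--         for i in range(4):
--             ny = y + dy[i]
--             nx = x + dx[i]
--             if 0 <= ny < n and 0 <= nx < m:
--                 if accessible_empty[ny][nx]:
--                     return True
--             else:
--                 return True
--         return False
--
--     # 2. 메인 로직: 요청 처리 루프
--     for req in requests:
--         item_type = req[0]
--
--         # 처리해야 할 좌표들 (set을 list로 변환하여 순회 중 변경에 영향 없도록 함)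
--         coords_to_process = list(item_locations[item_type])
--
--         # 새로 접근 가능해진 빈 공간들을 담을 큐
--         newly_accessible_q = deque()
--
--         # 제거된 컨테이너 좌표
--         removed_coords = set()
--
--         if len(req) == 1:  # 지게차(Forklift) 요청
--             for r, c in coords_to_process:
--                 is_accessible = forklift(r, c)
--
--                 if is_accessible:
--                     removed_coords.add((r, c))
--                     grid[r][c] = '-'
--                     newly_accessible_q.append((r, c))  # 새로 생긴 빈 공간은 이제 접근 가능
--
--         else:  # 크레인(Crane) 요청
--             for r, c in coords_to_process:
--                 removed_coords.add((r, c))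
--                 grid[r][c] = '-'
--
--                 # 새로 생긴 빈 공간이 경계에 있거나, 기존의 '접근 가능한 빈 공간'과 인접하면 큐에 추가
--                 is_seed =  forklift(r, c)
--                 if is_seed:
--                     newly_accessible_q.append((r, c))
--
--         # 3. 상태 업데이트
--         if removed_coords:
--             remaining_items -= len(removed_coords)
--             item_locations[item_type] -= removed_coords
--
--         # 4. '접근 가능한 빈 공간' 전파 (BFS)
--         # 새로 생긴 '접근 가능한 빈 공간'들로부터 탐색을 시작하여,
--         # 이로 인해 연결되는 다른 모든 빈 공간들의 상태를 업데이트
--         while newly_accessible_q: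
--             r, c = newly_accessible_q.popleft()
--
--             if accessible_empty[r][c]:
--                 continue
--
--             accessible_empty[r][c] = True
--
--             for i in range(4):
--                 nr, nc = r + dy[i], c + dx[i]
--                 if 0 <= nr < n and 0 <= nc < m and not accessible_empty[nr][nc] and grid[nr][nc] == '-':
--                     newly_accessible_q.append((nr, nc))
--
--     return remaining_items
-- ===== SOURCE B (Python) =====
-- def solution(storage, requests):
--     n = len(storage)
--     m = len(storage[0])
--     removed = set()
--     acc = set()
--
--     def exposed(r, c):
--         for rr, cc in ((r - 1, c), (r + 1, c), (r, c - 1), (r, c + 1)):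
--             if not (0 <= rr < n and 0 <= cc < m) or (rr, cc) in acc:
--                 return True
--         return False
--
--     def near_acc(r, c):
--         for rr, cc in ((r - 1, c), (r + 1, c), (r, c - 1), (r, c + 1)):
--             if 0 <= rr < n and 0 <= cc < m and (rr, cc) in acc:
--                 return True
--         return False
--
--     for req in requests:
--         t = req[0]
--         pend = [(r, c) for r in range(n) for c in range(m)
--                 if storage[r][c] == t and (r, c) not in removed]
--         if len(req) == 1:
--             pend = [p for p in pend if exposed(*p)]
--         seeds = [p for p in pend if exposed(*p)]
--         removed.update(pend)
--         acc.update(seeds)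
--         changed = True
--         while changed:
--             changed = False
--             for r in range(n):
--                 for c in range(m):
--                     if (r, c) not in acc and ((r, c) in removed or storage[r][c] == '-') and near_acc(r, c):
--                         acc.add((r, c))
--                         changed = True
--     return n * m - len(removed)
-- ===== Notes on version B (the rewrite author's own statement) =====
-- stated objective: alternative
-- what changed: B drops A's mutable grid, per-item location index, boolean accessibility matrix and deque BFS; it keeps just two coordinate sets (removed, accessible) over the immutable storage, rescans the grid for each request's candidates, and closes accessibility by whole-grid sweeps to a fixpoint instead of an incremental queue flood.
import Mathlib
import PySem

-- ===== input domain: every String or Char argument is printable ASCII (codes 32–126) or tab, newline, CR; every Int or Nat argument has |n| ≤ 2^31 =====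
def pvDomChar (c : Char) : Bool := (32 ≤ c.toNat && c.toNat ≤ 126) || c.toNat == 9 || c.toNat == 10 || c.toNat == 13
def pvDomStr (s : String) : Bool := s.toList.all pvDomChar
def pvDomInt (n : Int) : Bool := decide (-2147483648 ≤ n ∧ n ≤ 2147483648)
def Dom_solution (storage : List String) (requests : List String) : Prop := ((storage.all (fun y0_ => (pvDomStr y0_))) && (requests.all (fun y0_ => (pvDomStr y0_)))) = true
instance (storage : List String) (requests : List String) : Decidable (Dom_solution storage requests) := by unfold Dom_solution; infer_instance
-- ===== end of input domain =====

-- B replaces A's mutable grid + per-item location index + boolean accessibility matrix + deque BFS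
-- by two coordinate sets over the immutable storage, rescanning the grid per request and closing
-- accessibility by sweep-to-fixpoint (objective: alternative).
-- A's Python iterates over Python sets; its final return value is independent of that iteration
-- order, so the ports' deterministic insertion order is output-faithful.

-- ===== PORT A =====
def pvGet2 {α : Type} (g : List (List α)) (d : α) (r c : Int) : α :=
  (g.getD r.toNat []).getD c.toNat d

def pvSet2 {α : Type} (g : List (List α)) (r c : Int) (a : α) : List (List α) :=
  g.modify r.toNat (fun row => row.set c.toNat a)

def pvDyDx : List (Int × Int) := [(-1, 0), (1, 0), (0, -1), (0, 1)]

-- the for-loop of A's `forklift` with its early returns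
def pvForkGo (n m : Int) (acc : List (List Bool)) (y x : Int) : List (Int × Int) → Bool
  | [] => false
  | d :: rest =>
    let ny := y + d.1
    let nx := x + d.2
    if 0 ≤ ny ∧ ny < n ∧ 0 ≤ nx ∧ nx < m then
      if pvGet2 acc false ny nx then true else pvForkGo n m acc y x rest
    else true

def pvForklift (n m : Int) (acc : List (List Bool)) (y x : Int) : Bool :=
  pvForkGo n m acc y x pvDyDx

-- item_locations: defaultdict(set) filled cell by cell
def pvBuildLoc (grid : List (List Char)) (n m : Int) : PySem.Dict Char (PySem.Set (Int × Int)) :=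
  (PySem.List.pyRange 0 n 1).foldl (fun d r =>
    (PySem.List.pyRange 0 m 1).foldl (fun d c =>
      d.modify (pvGet2 grid ' ' r c) PySem.Set.empty (fun s => PySem.Set.add s (r, c))) d)
    PySem.Dict.empty

-- one iteration of the forklift-request loop body (state: grid, removed_coords, queue)
def pvForkStep (n m : Int) (acc : List (List Bool))
    (st : List (List Char) × PySem.Set (Int × Int) × List (Int × Int)) (p : Int × Int) :
    List (List Char) × PySem.Set (Int × Int) × List (Int × Int) :=
  if pvForklift n m acc p.1 p.2 then
    (pvSet2 st.1 p.1 p.2 '-', PySem.Set.add st.2.1 p, st.2.2 ++ [p])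
  else st

-- one iteration of the crane-request loop body
def pvCraneStep (n m : Int) (acc : List (List Bool))
    (st : List (List Char) × PySem.Set (Int × Int) × List (Int × Int)) (p : Int × Int) :
    List (List Char) × PySem.Set (Int × Int) × List (Int × Int) :=
  (pvSet2 st.1 p.1 p.2 '-', PySem.Set.add st.2.1 p,
    if pvForklift n m acc p.1 p.2 then st.2.2 ++ [p] else st.2.2)

-- the inner `for i in range(4)` of the BFS (pushes onto the queue)
def pvPushes (n m : Int) (grid : List (List Char)) (acc : List (List Bool)) (r c : Int) :
    List (Int × Int) :=
  pvDyDx.foldl (fun q d =>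
    let nr := r + d.1
    let nc := c + d.2
    if (0 ≤ nr ∧ nr < n ∧ 0 ≤ nc ∧ nc < m) ∧ pvGet2 acc false nr nc = false ∧
        pvGet2 grid ' ' nr nc = '-' then q ++ [(nr, nc)] else q) []

-- `while newly_accessible_q:` — fuel only makes the loop total, it is proved never to run out
def pvBFS (n m : Int) (grid : List (List Char)) :
    Nat → List (List Bool) → List (Int × Int) → List (List Bool)
  | _, acc, [] => acc
  | 0, acc, _ :: _ => acc
  | fuel + 1, acc, p :: q =>
    if pvGet2 acc false p.1 p.2 then pvBFS n m grid fuel acc q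
    else
      let acc2 := pvSet2 acc p.1 p.2 true
      pvBFS n m grid fuel acc2 (q ++ pvPushes n m grid acc2 p.1 p.2)

-- body of `for req in requests:`
def pvStepA (n m : Int)
    (st : List (List Char) × PySem.Dict Char (PySem.Set (Int × Int)) × Int × List (List Bool))
    (req : String) :
    List (List Char) × PySem.Dict Char (PySem.Set (Int × Int)) × Int × List (List Bool) :=
  let t := req.toList.headD ' '
  let coords : List (Int × Int) := st.2.1.getD t PySem.Set.empty
  let res :=
    if req.toList.length = 1 then coords.foldl (pvForkStep n m st.2.2.2) (st.1, PySem.Set.empty, [])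
    else coords.foldl (pvCraneStep n m st.2.2.2) (st.1, PySem.Set.empty, [])
  let grid := res.1
  let removed := res.2.1
  let q := res.2.2
  let remaining := if removed.isEmpty then st.2.2.1 else st.2.2.1 - removed.length
  let loc := if removed.isEmpty then st.2.1
             else st.2.1.modify t PySem.Set.empty (fun s => PySem.Set.diff s removed)
  let acc := pvBFS n m grid (q.length + 4 * (n.toNat * m.toNat) + 1) st.2.2.2 q
  (grid, loc, remaining, acc)

def solution (storage : List String) (requests : List String) : Int :=
  let n : Int := storage.length
  let m : Int := ((storage.headD "").toList.length : Int)   -- storage[0]; Pre_ excludes empty storage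
  let grid := storage.map String.toList
  let loc := pvBuildLoc grid n m
  let acc : List (List Bool) := List.replicate n.toNat (List.replicate m.toNat false)
  (requests.foldl (pvStepA n m) (grid, loc, n * m, acc)).2.2.1

-- ===== PORT B =====
def pvOrig (storage : List String) (r c : Int) : Char :=
  (storage.getD r.toNat "").toList.getD c.toNat ' '

def pvNbrs (r c : Int) : List (Int × Int) := [(r - 1, c), (r + 1, c), (r, c - 1), (r, c + 1)]

def pvExposed (n m : Int) (acc : PySem.Set (Int × Int)) (r c : Int) : Bool :=
  (pvNbrs r c).any fun p =>
    !(decide (0 ≤ p.1 ∧ p.1 < n ∧ 0 ≤ p.2 ∧ p.2 < m)) || PySem.Set.contains acc p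

def pvNearAcc (n m : Int) (acc : PySem.Set (Int × Int)) (r c : Int) : Bool :=
  (pvNbrs r c).any fun p =>
    decide (0 ≤ p.1 ∧ p.1 < n ∧ 0 ≤ p.2 ∧ p.2 < m) && PySem.Set.contains acc p

-- one full `for r in range(n): for c in range(m):` pass of the closure loop
def pvSweep (n m : Int) (storage : List String) (removed : PySem.Set (Int × Int))
    (acc0 : PySem.Set (Int × Int)) : PySem.Set (Int × Int) × Bool :=
  (PySem.List.pyRange 0 n 1).foldl (fun st r =>
    (PySem.List.pyRange 0 m 1).foldl (fun (st : PySem.Set (Int × Int) × Bool) c =>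
      if !PySem.Set.contains st.1 (r, c) &&
          (PySem.Set.contains removed (r, c) || pvOrig storage r c == '-') &&
          pvNearAcc n m st.1 r c
      then (PySem.Set.add st.1 (r, c), true) else st) st)
    (acc0, false)

-- `while changed:` — fuel only makes the loop total, it is proved never to run out
def pvSweepLoop (n m : Int) (storage : List String) (removed : PySem.Set (Int × Int)) :
    Nat → PySem.Set (Int × Int) → PySem.Set (Int × Int)
  | 0, acc => acc
  | fuel + 1, acc =>
    let res := pvSweep n m storage removed acc
    if res.2 then pvSweepLoop n m storage removed fuel res.1 else res.1

-- body of `for req in requests:`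
def pvStepB (n m : Int) (storage : List String)
    (st : PySem.Set (Int × Int) × PySem.Set (Int × Int)) (req : String) :
    PySem.Set (Int × Int) × PySem.Set (Int × Int) :=
  let t := req.toList.headD ' '
  let pend0 := (PySem.List.pyRange 0 n 1).flatMap fun r =>
    ((PySem.List.pyRange 0 m 1).filter fun c =>
      pvOrig storage r c == t && !PySem.Set.contains st.1 (r, c)).map fun c => (r, c)
  let pend := if req.toList.length = 1 then
      pend0.filter fun p => pvExposed n m st.2 p.1 p.2
    else pend0
  let seeds := pend.filter fun p => pvExposed n m st.2 p.1 p.2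
  let removed := PySem.Set.update st.1 pend
  let acc := PySem.Set.update st.2 seeds
  (removed, pvSweepLoop n m storage removed (n.toNat * m.toNat + 1) acc)

def solution_alt (storage : List String) (requests : List String) : Int :=
  let n : Int := storage.length
  let m : Int := ((storage.headD "").toList.length : Int)
  let fin := requests.foldl (pvStepB n m storage) (PySem.Set.empty, PySem.Set.empty)
  n * m - fin.1.length

-- ===== PRECONDITION & SPEC =====
-- Pre_ excludes exactly the inputs where A raises IndexError: empty storage (storage[0]),
-- a row shorter than row 0 (grid[r][c] for c < m), or an empty request string (req[0]).
def Pre_solution (storage : List String) (requests : List String) : Prop :=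
  storage ≠ [] ∧ (∀ row ∈ storage, (storage.headD "").toList.length ≤ row.toList.length) ∧
    (∀ req ∈ requests, req ≠ "")
instance (storage : List String) (requests : List String) : Decidable (Pre_solution storage requests) := by
  unfold Pre_solution; infer_instance

def pvWitness_solution : List String × List String := (["AB", "BA"], ["A", "BB"])

def Spec_solution (storage : List String) (requests : List String) (out : Int) : Prop :=
  out = solution_alt storage requests
instance (storage : List String) (requests : List String) (out : Int) : Decidable (Spec_solution storage requests out) := by
  unfold Spec_solution; infer_instance

-- ===== CLAIM (what is proved, stated in full; the proofs are below) =====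
def Claim_equal_solution : Prop := ∀ (storage : List String) (requests : List String),
  Dom_solution storage requests → Pre_solution storage requests →
    Spec_solution storage requests (solution storage requests)

-- ===== LEMMAS AND PROOFS =====

-- ---------- abstract vocabulary ----------
def pvInB (n m : Int) (p : Int × Int) : Prop := 0 ≤ p.1 ∧ p.1 < n ∧ 0 ≤ p.2 ∧ p.2 < m

def pvEmptyAt (storage : List String) (R : List (Int × Int)) (p : Int × Int) : Prop :=
  p ∈ R ∨ pvOrig storage p.1 p.2 = '-'

def pvAdj (p q : Int × Int) : Prop := q ∈ pvNbrs p.1 p.2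

-- cells reachable from `base` by steps into in-bounds empty cells (the least such set)
inductive pvReach (n m : Int) (storage : List String) (R : List (Int × Int))
    (base : (Int × Int) → Prop) : (Int × Int) → Prop
  | base {p : Int × Int} : base p → pvReach n m storage R base p
  | step {p q : Int × Int} : pvReach n m storage R base p → pvAdj p q → pvInB n m q →
      pvEmptyAt storage R q → pvReach n m storage R base q

def pvClosed (n m : Int) (storage : List String) (R : List (Int × Int))
    (X : (Int × Int) → Prop) : Prop :=
  ∀ p, X p → ∀ q, pvAdj p q → pvInB n m q → pvEmptyAt storage R q → X q

def pvCells (n m : Int) : List (Int × Int) :=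
  (PySem.List.pyRange 0 n 1).flatMap fun r => (PySem.List.pyRange 0 m 1).map fun c => (r, c)

def pvExpP (n m : Int) (Acc : List (Int × Int)) (p : Int × Int) : Prop :=
  ∃ q ∈ pvNbrs p.1 p.2, ¬ pvInB n m q ∨ q ∈ Acc

def pvFalseCount (acc : List (List Bool)) : Nat := (acc.map (fun row => row.count false)).sum

-- the simulation invariant tying A's state to B's state
structure pvInv (n m : Int) (storage : List String)
    (stA : List (List Char) × PySem.Dict Char (PySem.Set (Int × Int)) × Int × List (List Bool))
    (stB : PySem.Set (Int × Int) × PySem.Set (Int × Int)) : Prop where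
  glen : stA.1.length = n.toNat
  grow : ∀ r : Nat, r < n.toNat → (stA.1.getD r []).length = (storage.getD r "").toList.length
  gval : ∀ p, pvInB n m p →
    pvGet2 stA.1 ' ' p.1 p.2 = (if p ∈ stB.1 then '-' else pvOrig storage p.1 p.2)
  lval : ∀ (t : Char) (p : Int × Int), (p ∈ stA.2.1.getD t PySem.Set.empty) ↔
    (pvInB n m p ∧ pvOrig storage p.1 p.2 = t ∧ p ∉ stB.1)
  rem : stA.2.2.1 = n * m - stB.1.length
  alen : stA.2.2.2.length = n.toNat
  arow : ∀ r : Nat, r < n.toNat → (stA.2.2.2.getD r []).length = m.toNat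
  aval : ∀ p, pvInB n m p → (pvGet2 stA.2.2.2 false p.1 p.2 = true ↔ p ∈ stB.2)
  Rnd : stB.1.Nodup
  Rin : ∀ p ∈ stB.1, pvInB n m p
  And : stB.2.Nodup
  Ain : ∀ p ∈ stB.2, pvInB n m p
  Aemp : ∀ p ∈ stB.2, pvEmptyAt storage stB.1 p
  Acl : pvClosed n m storage stB.1 (fun p => p ∈ stB.2)

-- ---------- small facts ----------
lemma pvNbrs_eq_dirs (r c : Int) : pvNbrs r c = pvDyDx.map (fun d => (r + d.1, c + d.2)) := by
  simp [pvNbrs, pvDyDx]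
  omega

lemma pvAdj_symm {p q : Int × Int} (h : pvAdj p q) : pvAdj q p := by
  obtain ⟨a, b⟩ := p; obtain ⟨x, y⟩ := q
  simp only [pvAdj, pvNbrs, List.mem_cons, Prod.mk.injEq,
    List.not_mem_nil, or_false] at h ⊢
  rcases h with ⟨h1, h2⟩ | ⟨h1, h2⟩ | ⟨h1, h2⟩ | ⟨h1, h2⟩ <;> subst h1 <;> subst h2 <;> omega

lemma mem_pvCells {n m : Int} {p : Int × Int} : p ∈ pvCells n m ↔ pvInB n m p := by
  obtain ⟨a, b⟩ := p
  simp only [pvCells, List.mem_flatMap, List.mem_map, PySem.List.mem_pyRange_one, pvInB]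
  constructor
  · rintro ⟨r, hr, c, hc, h⟩
    cases h
    exact ⟨hr.1, hr.2, hc.1, hc.2⟩
  · rintro ⟨h1, h2, h3, h4⟩
    exact ⟨a, ⟨h1, h2⟩, b, ⟨h3, h4⟩, rfl⟩

lemma length_pvCells (n m : Int) : (pvCells n m).length = n.toNat * m.toNat := by
  rw [pvCells, List.length_flatMap]
  have h : ∀ r ∈ PySem.List.pyRange 0 n 1,
      ((PySem.List.pyRange 0 m 1).map fun c => (r, c)).length = m.toNat := by
    intro r _
    simp [PySem.List.length_pyRange_one]
  rw [List.map_congr_left h, List.map_const', List.sum_replicate, smul_eq_mul,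
    PySem.List.length_pyRange_one]
  simp

lemma pvNodup_length_le {l₁ l₂ : List (Int × Int)} (h1 : l₁.Nodup) (h2 : l₁ ⊆ l₂) :
    l₁.length ≤ l₂.length :=
  List.Subperm.length_le (List.subperm_of_subset h1 h2)

-- ---------- 2D table lemmas ----------
lemma pvGetD_set_ne {α : Type} (row : List α) {i j : Nat} {a : α} (h : j ≠ i) (d : α) :
    (row.set i a).getD j d = row.getD j d := by
  by_cases hj : j < row.length
  · rw [List.getD_eq_getElem?_getD, List.getD_eq_getElem?_getD,
      List.getElem?_eq_getElem (by simpa using hj), List.getElem?_eq_getElem hj]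
    simp [Ne.symm h]
  · have hlen : (row.set i a).length = row.length := List.length_set
    rw [List.getD_eq_getElem?_getD, List.getD_eq_getElem?_getD,
      List.getElem?_eq_none (by omega), List.getElem?_eq_none (by omega)]

lemma length_pvSet2 {α : Type} (g : List (List α)) (r c : Int) (a : α) :
    (pvSet2 g r c a).length = g.length := by
  simp [pvSet2]

lemma rowlen_pvSet2 {α : Type} (g : List (List α)) (r c : Int) (a : α) (i : Nat) :
    ((pvSet2 g r c a).getD i []).length = (g.getD i []).length := by
  by_cases h : i < g.length
  · have h2 : i < (pvSet2 g r c a).length := by simpa [length_pvSet2] using h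
    rw [List.getD_eq_getElem?_getD, List.getD_eq_getElem?_getD,
      List.getElem?_eq_getElem h2, List.getElem?_eq_getElem h]
    simp only [pvSet2, List.getElem_modify, Option.getD_some]
    split <;> simp
  · have hlen := length_pvSet2 g r c a
    rw [List.getD_eq_getElem?_getD, List.getD_eq_getElem?_getD,
      List.getElem?_eq_none (by omega), List.getElem?_eq_none (by omega)]

lemma pvGet2_pvSet2_self {α : Type} {g : List (List α)} {r c : Int} {a : α} {d : α}
    (h2 : r.toNat < g.length) (h3 : c.toNat < (g.getD r.toNat []).length) :
    pvGet2 (pvSet2 g r c a) d r c = a := by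
  have hrow : (pvSet2 g r c a).getD r.toNat [] = (g.getD r.toNat []).set c.toNat a := by
    rw [pvSet2, List.getD_eq_getElem?_getD, List.getElem?_eq_getElem (by simpa using h2),
      List.getElem_modify, List.getD_eq_getElem?_getD, List.getElem?_eq_getElem h2]
    simp
  rw [pvGet2, hrow, List.getD_eq_getElem?_getD,
    List.getElem?_eq_getElem (by simpa using h3), List.getElem_set]
  simp

lemma pvGet2_pvSet2_ne {α : Type} {g : List (List α)} {r c r' c' : Int} {a : α} {d : α}
    (h : r'.toNat ≠ r.toNat ∨ c'.toNat ≠ c.toNat) :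
    pvGet2 (pvSet2 g r c a) d r' c' = pvGet2 g d r' c' := by
  by_cases hr : r'.toNat = r.toNat
  · have hc : c'.toNat ≠ c.toNat := by tauto
    by_cases hlt : r.toNat < g.length
    · have hrow : (pvSet2 g r c a).getD r.toNat [] = (g.getD r.toNat []).set c.toNat a := by
        rw [pvSet2, List.getD_eq_getElem?_getD, List.getElem?_eq_getElem (by simpa using hlt),
          List.getElem_modify, List.getD_eq_getElem?_getD, List.getElem?_eq_getElem hlt]
        simp
      rw [pvGet2, pvGet2, hr, hrow, pvGetD_set_ne _ hc]
    · have hlen := length_pvSet2 g r c a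
      have hrow : (pvSet2 g r c a).getD r'.toNat [] = g.getD r'.toNat [] := by
        rw [List.getD_eq_getElem?_getD, List.getD_eq_getElem?_getD,
          List.getElem?_eq_none (by omega), List.getElem?_eq_none (by omega)]
      rw [pvGet2, pvGet2, hrow]
  · have hrow : (pvSet2 g r c a).getD r'.toNat [] = g.getD r'.toNat [] := by
      by_cases hlt : r'.toNat < g.length
      · rw [pvSet2, List.getD_eq_getElem?_getD, List.getElem?_eq_getElem (by simpa using hlt),
          List.getElem_modify, List.getD_eq_getElem?_getD, List.getElem?_eq_getElem hlt]
        simp [Ne.symm hr]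
      · have hlen := length_pvSet2 g r c a
        rw [List.getD_eq_getElem?_getD, List.getD_eq_getElem?_getD,
          List.getElem?_eq_none (by omega), List.getElem?_eq_none (by omega)]
    rw [pvGet2, pvGet2, hrow]

lemma pvInB_toNat_ne {n m : Int} {p q : Int × Int} (hp : pvInB n m p) (hq : pvInB n m q)
    (h : p ≠ q) : p.1.toNat ≠ q.1.toNat ∨ p.2.toNat ≠ q.2.toNat := by
  obtain ⟨a, b⟩ := p; obtain ⟨x, y⟩ := q
  simp only [pvInB] at hp hq
  simp only [ne_eq, Prod.mk.injEq, not_and] at h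
  by_cases hax : a = x
  · right
    have : b ≠ y := by intro hby; exact (h hax) hby
    omega
  · left; omega

lemma pvFalseCount_le {n m : Int} {acc : List (List Bool)} (h1 : acc.length = n.toNat)
    (h2 : ∀ r : Nat, r < n.toNat → (acc.getD r []).length = m.toNat) :
    pvFalseCount acc ≤ n.toNat * m.toNat := by
  have hb : ∀ x ∈ acc.map (fun row => row.count false), x ≤ m.toNat := by
    intro x hx
    obtain ⟨row, hrow, rfl⟩ := List.mem_map.mp hx
    obtain ⟨i, hi, rfl⟩ := List.mem_iff_getElem.mp hrow
    have hlen := h2 i (by omega)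
    rw [List.getD_eq_getElem?_getD, List.getElem?_eq_getElem hi] at hlen
    simp only [Option.getD_some] at hlen
    calc acc[i].count false ≤ acc[i].length := List.count_le_length
    _ = m.toNat := hlen
  calc pvFalseCount acc ≤ (acc.map (fun row => row.count false)).length • m.toNat :=
        List.sum_le_card_nsmul _ _ hb
  _ = n.toNat * m.toNat := by simp [h1]

lemma count_false_set {row : List Bool} {i : Nat} (h : i < row.length)
    (hf : row.getD i true = false) : (row.set i true).count false + 1 = row.count false := by
  induction row generalizing i with
  | nil => simp at h
  | cons b t ih =>
    cases i with
    | zero =>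
      simp only [List.getD_eq_getElem?_getD, List.getElem?_cons_zero, Option.getD_some] at hf
      subst hf
      simp
    | succ j =>
      have h' : j < t.length := by simpa using h
      have hf' : t.getD j true = false := by simpa using hf
      have := ih h' hf'
      simp only [List.set_cons_succ, List.count_cons]
      omega

lemma pvFalseCount_modify (cN : Nat) :
    ∀ (acc : List (List Bool)) (k : Nat), k < acc.length → cN < (acc.getD k []).length →
    (acc.getD k []).getD cN true = false →
    pvFalseCount (acc.modify k (fun row => row.set cN true)) + 1 = pvFalseCount acc := by
  intro acc
  induction acc with
  | nil => intro k hk; simp at hk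
  | cons rowh t ih =>
    intro k hk hc hfe
    cases k with
    | zero =>
      simp only [List.getD_cons_zero] at hc hfe
      simp only [List.modify_zero_cons, pvFalseCount, List.map_cons, List.sum_cons]
      have := count_false_set hc hfe
      omega
    | succ j =>
      simp only [List.getD_cons_succ] at hc hfe
      have hj : j < t.length := by simpa using hk
      have := ih j hj hc hfe
      simp only [List.modify_succ_cons, pvFalseCount, List.map_cons, List.sum_cons] at this ⊢
      omega

lemma pvFalseCount_set2 {acc : List (List Bool)} {r c : Int}
    (h2 : r.toNat < acc.length) (h3 : c.toNat < (acc.getD r.toNat []).length)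
    (hf : pvGet2 acc false r c = false) :
    pvFalseCount (pvSet2 acc r c true) + 1 = pvFalseCount acc := by
  have hfe : (acc.getD r.toNat []).getD c.toNat true = false := by
    rw [pvGet2] at hf
    rw [List.getD_eq_getElem?_getD, List.getElem?_eq_getElem h3]
    rw [List.getD_eq_getElem?_getD, List.getElem?_eq_getElem h3] at hf
    simpa using hf
  exact pvFalseCount_modify c.toNat acc r.toNat h2 h3 hfe

-- ---------- exposed / forklift correspondence ----------
lemma pvExposed_iff {n m : Int} {Acc : PySem.Set (Int × Int)} (r c : Int) :
    pvExposed n m Acc r c = true ↔ pvExpP n m Acc (r, c) := by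
  simp only [pvExposed, pvExpP, List.any_eq_true, Bool.or_eq_true, Bool.not_eq_true',
    decide_eq_false_iff_not, pvInB]
  constructor
  · rintro ⟨p, hp, h⟩
    refine ⟨p, hp, ?_⟩
    rcases h with h | h
    · exact Or.inl h
    · exact Or.inr ((PySem.Set.contains_iff Acc p).mp h)
  · rintro ⟨p, hp, h⟩
    refine ⟨p, hp, ?_⟩
    rcases h with h | h
    · exact Or.inl h
    · exact Or.inr ((PySem.Set.contains_iff Acc p).mpr h)

lemma pvNearAcc_iff {n m : Int} {Acc : PySem.Set (Int × Int)} (r c : Int) :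
    pvNearAcc n m Acc r c = true ↔ ∃ q ∈ pvNbrs r c, pvInB n m q ∧ q ∈ Acc := by
  simp only [pvNearAcc, List.any_eq_true, Bool.and_eq_true, decide_eq_true_eq, pvInB]
  constructor
  · rintro ⟨p, hp, h1, h2⟩
    exact ⟨p, hp, h1, (PySem.Set.contains_iff Acc p).mp h2⟩
  · rintro ⟨p, hp, h1, h2⟩
    exact ⟨p, hp, h1, (PySem.Set.contains_iff Acc p).mpr h2⟩

lemma pvForkGo_any {n m : Int} {aT : List (List Bool)} {y x : Int} (l : List (Int × Int)) :
    pvForkGo n m aT y x l = true ↔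
      ∃ d ∈ l, ¬ pvInB n m (y + d.1, x + d.2) ∨ pvGet2 aT false (y + d.1) (x + d.2) = true := by
  induction l with
  | nil => simp [pvForkGo]
  | cons d rest ih =>
    rw [pvForkGo]
    by_cases hb : 0 ≤ y + d.1 ∧ y + d.1 < n ∧ 0 ≤ x + d.2 ∧ x + d.2 < m
    · rw [if_pos hb]
      by_cases hg : pvGet2 aT false (y + d.1) (x + d.2) = true
      · rw [if_pos hg]
        simp only [true_iff]
        exact ⟨d, List.mem_cons_self .., Or.inr hg⟩
      · rw [if_neg hg]
        rw [ih]
        constructor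
        · rintro ⟨e, he, hor⟩
          exact ⟨e, List.mem_cons_of_mem _ he, hor⟩
        · rintro ⟨e, he, hor⟩
          rcases List.mem_cons.mp he with rfl | he'
          · rcases hor with h | h
            · exact absurd hb (by simpa [pvInB] using h)
            · exact absurd h hg
          · exact ⟨e, he', hor⟩
    · rw [if_neg hb]
      simp only [true_iff]
      exact ⟨d, List.mem_cons_self .., Or.inl (by simpa [pvInB] using hb)⟩

lemma pvForklift_iff {n m : Int} {aT : List (List Bool)} {Acc : PySem.Set (Int × Int)}
    (haval : ∀ p, pvInB n m p → (pvGet2 aT false p.1 p.2 = true ↔ p ∈ Acc)) (r c : Int) :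
    pvForklift n m aT r c = true ↔ pvExpP n m Acc (r, c) := by
  rw [pvForklift, pvForkGo_any, pvExpP]
  rw [pvNbrs_eq_dirs]
  constructor
  · rintro ⟨d, hd, hor⟩
    refine ⟨(r + d.1, c + d.2), List.mem_map_of_mem hd, ?_⟩
    rcases hor with h | h
    · exact Or.inl h
    · by_cases hin : pvInB n m (r + d.1, c + d.2)
      · exact Or.inr ((haval _ hin).mp h)
      · exact Or.inl hin
  · rintro ⟨q, hq, hor⟩
    obtain ⟨d, hd, rfl⟩ := List.mem_map.mp hq
    refine ⟨d, hd, ?_⟩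
    rcases hor with h | h
    · exact Or.inl h
    · by_cases hin : pvInB n m (r + d.1, c + d.2)
      · exact Or.inr ((haval _ hin).mpr h)
      · exact Or.inl hin

-- ---------- A's per-request folds ----------
lemma pvForkFold {n m : Int} (aT : List (List Bool)) :
    ∀ (coords : List (Int × Int)) (g : List (List Char)) (rs : PySem.Set (Int × Int))
      (q : List (Int × Int)),
    (∀ p ∈ coords, pvInB n m p) →
    n.toNat ≤ g.length → (∀ r : Nat, r < n.toNat → m.toNat ≤ (g.getD r []).length) →
    (coords.foldl (pvForkStep n m aT) (g, rs, q)).1.length = g.length ∧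
    (∀ i : Nat, ((coords.foldl (pvForkStep n m aT) (g, rs, q)).1.getD i []).length =
      (g.getD i []).length) ∧
    (rs.Nodup → (coords.foldl (pvForkStep n m aT) (g, rs, q)).2.1.Nodup) ∧
    (∀ p, p ∈ (coords.foldl (pvForkStep n m aT) (g, rs, q)).2.1 ↔
      p ∈ rs ∨ (p ∈ coords ∧ pvForklift n m aT p.1 p.2 = true)) ∧
    (∀ p, p ∈ (coords.foldl (pvForkStep n m aT) (g, rs, q)).2.2 ↔
      p ∈ q ∨ (p ∈ coords ∧ pvForklift n m aT p.1 p.2 = true)) ∧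
    (∀ p, pvInB n m p →
      pvGet2 (coords.foldl (pvForkStep n m aT) (g, rs, q)).1 ' ' p.1 p.2 =
        (if p ∈ coords ∧ pvForklift n m aT p.1 p.2 = true then '-' else pvGet2 g ' ' p.1 p.2)) := by
  intro coords
  induction coords with
  | nil =>
    intro g rs q _ _ _
    refine ⟨rfl, fun i => rfl, fun h => h, ?_, ?_, ?_⟩ <;> simp
  | cons p rest ih =>
    intro g rs q hco hg1 hg2
    have hpin := hco p (List.mem_cons_self ..)
    rw [List.foldl_cons]
    by_cases hf : pvForklift n m aT p.1 p.2 = true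
    · have hstep : pvForkStep n m aT (g, rs, q) p =
        (pvSet2 g p.1 p.2 '-', PySem.Set.add rs p, q ++ [p]) := by
        simp [pvForkStep, hf]
      rw [hstep]
      obtain ⟨ih1, ih2, ih3, ih4, ih5, ih6⟩ :=
        ih (pvSet2 g p.1 p.2 '-') (PySem.Set.add rs p) (q ++ [p])
          (fun x hx => hco x (List.mem_cons_of_mem _ hx))
          (by rw [length_pvSet2]; exact hg1)
          (fun r hr => by rw [rowlen_pvSet2]; exact hg2 r hr)
      refine ⟨by rw [ih1, length_pvSet2], fun i => by rw [ih2, rowlen_pvSet2], ?_, ?_, ?_, ?_⟩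
      · intro hnd; exact ih3 (PySem.Set.nodup_add rs p hnd)
      · intro x
        rw [ih4, PySem.Set.mem_add]
        constructor
        · rintro ((hx | rfl) | ⟨hx, hfx⟩)
          · exact Or.inl hx
          · exact Or.inr ⟨List.mem_cons_self .., hf⟩
          · exact Or.inr ⟨List.mem_cons_of_mem _ hx, hfx⟩
        · rintro (hx | ⟨hx, hfx⟩)
          · exact Or.inl (Or.inl hx)
          · rcases List.mem_cons.mp hx with rfl | hx'
            · exact Or.inl (Or.inr rfl)
            · exact Or.inr ⟨hx', hfx⟩
      · intro x
        rw [ih5, List.mem_append, List.mem_singleton]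
        constructor
        · rintro ((hx | rfl) | ⟨hx, hfx⟩)
          · exact Or.inl hx
          · exact Or.inr ⟨List.mem_cons_self .., hf⟩
          · exact Or.inr ⟨List.mem_cons_of_mem _ hx, hfx⟩
        · rintro (hx | ⟨hx, hfx⟩)
          · exact Or.inl (Or.inl hx)
          · rcases List.mem_cons.mp hx with rfl | hx'
            · exact Or.inl (Or.inr rfl)
            · exact Or.inr ⟨hx', hfx⟩
      · intro x hxin
        rw [ih6 x hxin]
        by_cases hrest : x ∈ rest ∧ pvForklift n m aT x.1 x.2 = true
        · rw [if_pos hrest, if_pos ⟨List.mem_cons_of_mem _ hrest.1, hrest.2⟩]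
        · rw [if_neg hrest]
          by_cases hxp : x = p
          · subst hxp
            obtain ⟨ha, hb, hc, hd⟩ := hxin
            rw [pvGet2_pvSet2_self (by omega) (by have := hg2 x.1.toNat (by omega); omega),
              if_pos ⟨List.mem_cons_self .., hf⟩]
          · rw [pvGet2_pvSet2_ne (pvInB_toNat_ne hxin hpin hxp)]
            have hnot : ¬ (x ∈ p :: rest ∧ pvForklift n m aT x.1 x.2 = true) := by
              rintro ⟨hx, hfx⟩
              rcases List.mem_cons.mp hx with rfl | hx'
              · exact hxp rfl
              · exact hrest ⟨hx', hfx⟩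
            rw [if_neg hnot]
    · have hstep : pvForkStep n m aT (g, rs, q) p = (g, rs, q) := by
        simp [pvForkStep, hf]
      rw [hstep]
      obtain ⟨ih1, ih2, ih3, ih4, ih5, ih6⟩ :=
        ih g rs q (fun x hx => hco x (List.mem_cons_of_mem _ hx)) hg1 hg2
      have hcond : ∀ x : Int × Int, (x ∈ p :: rest ∧ pvForklift n m aT x.1 x.2 = true) ↔
          (x ∈ rest ∧ pvForklift n m aT x.1 x.2 = true) := by
        intro x
        constructor
        · rintro ⟨hx, hfx⟩
          rcases List.mem_cons.mp hx with rfl | hx'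
          · exact absurd hfx hf
          · exact ⟨hx', hfx⟩
        · rintro ⟨hx, hfx⟩
          exact ⟨List.mem_cons_of_mem _ hx, hfx⟩
      refine ⟨ih1, ih2, ih3, ?_, ?_, ?_⟩
      · intro x; rw [ih4, hcond]
      · intro x; rw [ih5, hcond]
      · intro x hxin; rw [ih6 x hxin, if_congr (hcond x) rfl rfl]

lemma pvCraneFold {n m : Int} (aT : List (List Bool)) :
    ∀ (coords : List (Int × Int)) (g : List (List Char)) (rs : PySem.Set (Int × Int))
      (q : List (Int × Int)),
    (∀ p ∈ coords, pvInB n m p) →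
    n.toNat ≤ g.length → (∀ r : Nat, r < n.toNat → m.toNat ≤ (g.getD r []).length) →
    (coords.foldl (pvCraneStep n m aT) (g, rs, q)).1.length = g.length ∧
    (∀ i : Nat, ((coords.foldl (pvCraneStep n m aT) (g, rs, q)).1.getD i []).length =
      (g.getD i []).length) ∧
    (rs.Nodup → (coords.foldl (pvCraneStep n m aT) (g, rs, q)).2.1.Nodup) ∧
    (∀ p, p ∈ (coords.foldl (pvCraneStep n m aT) (g, rs, q)).2.1 ↔ p ∈ rs ∨ p ∈ coords) ∧
    (∀ p, p ∈ (coords.foldl (pvCraneStep n m aT) (g, rs, q)).2.2 ↔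
      p ∈ q ∨ (p ∈ coords ∧ pvForklift n m aT p.1 p.2 = true)) ∧
    (∀ p, pvInB n m p →
      pvGet2 (coords.foldl (pvCraneStep n m aT) (g, rs, q)).1 ' ' p.1 p.2 =
        (if p ∈ coords then '-' else pvGet2 g ' ' p.1 p.2)) := by
  intro coords
  induction coords with
  | nil =>
    intro g rs q _ _ _
    refine ⟨rfl, fun i => rfl, fun h => h, ?_, ?_, ?_⟩ <;> simp
  | cons p rest ih =>
    intro g rs q hco hg1 hg2
    have hpin := hco p (List.mem_cons_self ..)
    rw [List.foldl_cons]
    have hstep : pvCraneStep n m aT (g, rs, q) p =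
        (pvSet2 g p.1 p.2 '-', PySem.Set.add rs p,
          if pvForklift n m aT p.1 p.2 = true then q ++ [p] else q) := by
      simp [pvCraneStep]
    rw [hstep]
    set q2 := if pvForklift n m aT p.1 p.2 = true then q ++ [p] else q with hq2
    obtain ⟨ih1, ih2, ih3, ih4, ih5, ih6⟩ :=
      ih (pvSet2 g p.1 p.2 '-') (PySem.Set.add rs p) q2
        (fun x hx => hco x (List.mem_cons_of_mem _ hx))
        (by rw [length_pvSet2]; exact hg1)
        (fun r hr => by rw [rowlen_pvSet2]; exact hg2 r hr)
    have hq2mem : ∀ x : Int × Int, x ∈ q2 ↔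
        x ∈ q ∨ (x = p ∧ pvForklift n m aT x.1 x.2 = true) := by
      intro x
      rw [hq2]
      by_cases hf : pvForklift n m aT p.1 p.2 = true
      · rw [if_pos hf, List.mem_append, List.mem_singleton]
        constructor
        · rintro (hx | rfl)
          · exact Or.inl hx
          · exact Or.inr ⟨rfl, hf⟩
        · rintro (hx | ⟨rfl, _⟩)
          · exact Or.inl hx
          · exact Or.inr rfl
      · rw [if_neg hf]
        constructor
        · exact Or.inl
        · rintro (hx | ⟨rfl, hfx⟩)
          · exact hx
          · exact absurd hfx hf
    refine ⟨by rw [ih1, length_pvSet2], fun i => by rw [ih2, rowlen_pvSet2], ?_, ?_, ?_, ?_⟩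
    · intro hnd; exact ih3 (PySem.Set.nodup_add rs p hnd)
    · intro x
      rw [ih4, PySem.Set.mem_add]
      constructor
      · rintro ((hx | rfl) | hx)
        · exact Or.inl hx
        · exact Or.inr (List.mem_cons_self ..)
        · exact Or.inr (List.mem_cons_of_mem _ hx)
      · rintro (hx | hx)
        · exact Or.inl (Or.inl hx)
        · rcases List.mem_cons.mp hx with rfl | hx'
          · exact Or.inl (Or.inr rfl)
          · exact Or.inr hx'
    · intro x
      rw [ih5, hq2mem]
      constructor
      · rintro ((hx | ⟨rfl, hfx⟩) | ⟨hx, hfx⟩)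
        · exact Or.inl hx
        · exact Or.inr ⟨List.mem_cons_self .., hfx⟩
        · exact Or.inr ⟨List.mem_cons_of_mem _ hx, hfx⟩
      · rintro (hx | ⟨hx, hfx⟩)
        · exact Or.inl (Or.inl hx)
        · rcases List.mem_cons.mp hx with rfl | hx'
          · exact Or.inl (Or.inr ⟨rfl, hfx⟩)
          · exact Or.inr ⟨hx', hfx⟩
    · intro x hxin
      rw [ih6 x hxin]
      by_cases hrest : x ∈ rest
      · rw [if_pos hrest, if_pos (List.mem_cons_of_mem _ hrest)]
      · rw [if_neg hrest]
        by_cases hxp : x = p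
        · subst hxp
          obtain ⟨ha, hb, hc, hd⟩ := hxin
          rw [pvGet2_pvSet2_self (by omega) (by have := hg2 x.1.toNat (by omega); omega),
            if_pos (List.mem_cons_self ..)]
        · rw [pvGet2_pvSet2_ne (pvInB_toNat_ne hxin hpin hxp)]
          have hnot : ¬ x ∈ p :: rest := by
            intro hx
            rcases List.mem_cons.mp hx with rfl | hx'
            · exact hxp rfl
            · exact hrest hx'
          rw [if_neg hnot]

-- ---------- the item-location dictionary ----------
lemma pvGet2_map_toList (storage : List String) (r c : Int) :
    pvGet2 (storage.map String.toList) ' ' r c = pvOrig storage r c := by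
  rw [pvGet2, pvOrig]
  have h : ([] : List Char) = "".toList := rfl
  rw [h, List.getD_map]

lemma pvDictFold_mem (key : (Int × Int) → Char) :
    ∀ (l : List (Int × Int)) (d : PySem.Dict Char (PySem.Set (Int × Int))) (t : Char)
      (p : Int × Int),
    (p ∈ (l.foldl (fun d x =>
        d.modify (key x) PySem.Set.empty (fun s => PySem.Set.add s x)) d).getD t
        PySem.Set.empty ↔
      p ∈ d.getD t PySem.Set.empty ∨ (p ∈ l ∧ key p = t)) := by
  intro l
  induction l with
  | nil => simp
  | cons x rest ih =>
    intro d t p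
    rw [List.foldl_cons, ih, PySem.Dict.getD_modify]
    by_cases ht : t = key x
    · subst ht
      rw [if_pos rfl, PySem.Set.mem_add]
      constructor
      · rintro ((hp | rfl) | ⟨hp, hk⟩)
        · exact Or.inl hp
        · exact Or.inr ⟨List.mem_cons_self .., rfl⟩
        · exact Or.inr ⟨List.mem_cons_of_mem _ hp, hk⟩
      · rintro (hp | ⟨hp, hk⟩)
        · exact Or.inl (Or.inl hp)
        · rcases List.mem_cons.mp hp with rfl | hp'
          · exact Or.inl (Or.inr rfl)
          · exact Or.inr ⟨hp', hk⟩
    · rw [if_neg ht]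
      constructor
      · rintro (hp | ⟨hp, hk⟩)
        · exact Or.inl hp
        · exact Or.inr ⟨List.mem_cons_of_mem _ hp, hk⟩
      · rintro (hp | ⟨hp, hk⟩)
        · exact Or.inl hp
        · rcases List.mem_cons.mp hp with rfl | hp'
          · exact absurd hk.symm ht
          · exact Or.inr ⟨hp', hk⟩

lemma pvBuildLoc_getD {storage : List String} :
    ∀ (t : Char) (p : Int × Int),
      p ∈ (pvBuildLoc (storage.map String.toList) (storage.length : Int)
            ((storage.headD "").toList.length : Int)).getD t PySem.Set.empty ↔
        (pvInB (storage.length : Int) ((storage.headD "").toList.length : Int) p ∧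
          pvOrig storage p.1 p.2 = t) := by
  intro t p
  set n : Int := (storage.length : Int)
  set m : Int := ((storage.headD "").toList.length : Int)
  set g := storage.map String.toList with hg
  have hfold : pvBuildLoc g n m = (pvCells n m).foldl (fun d x =>
      d.modify (pvGet2 g ' ' x.1 x.2) PySem.Set.empty (fun s => PySem.Set.add s x))
      PySem.Dict.empty := by
    rw [pvBuildLoc, pvCells, List.foldl_flatMap]
    simp only [List.foldl_map]
  rw [hfold, pvDictFold_mem (fun x => pvGet2 g ' ' x.1 x.2), PySem.Dict.getD_empty]
  simp only [PySem.Set.empty, List.not_mem_nil, false_or, mem_pvCells]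
  constructor
  · rintro ⟨hin, hk⟩
    rw [hg, pvGet2_map_toList] at hk
    exact ⟨hin, hk⟩
  · rintro ⟨hin, hk⟩
    refine ⟨hin, ?_⟩
    rw [hg, pvGet2_map_toList]
    exact hk

-- ---------- reachability ----------
lemma pvReach_props {n m : Int} {storage : List String} {R : List (Int × Int)}
    {base : (Int × Int) → Prop}
    (h1 : ∀ p, base p → pvInB n m p) (h2 : ∀ p, base p → pvEmptyAt storage R p) :
    ∀ p, pvReach n m storage R base p → pvInB n m p ∧ pvEmptyAt storage R p := by
  intro p h
  induction h with
  | base hp => exact ⟨h1 _ hp, h2 _ hp⟩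
  | step _ hadj hin hemp _ => exact ⟨hin, hemp⟩

-- ---------- generic append-if folds (A's queue pushes) ----------
lemma pvFoldAppendIf_mem {α β : Type} (P : β → Prop) [DecidablePred P] (f : β → α) :
    ∀ (l : List β) (init : List α) (x : α),
    (x ∈ l.foldl (fun acc d => if P d then acc ++ [f d] else acc) init ↔
      x ∈ init ∨ ∃ d ∈ l, P d ∧ x = f d) := by
  intro l
  induction l with
  | nil => simp
  | cons d rest ih =>
    intro init x
    rw [List.foldl_cons]
    by_cases hd : P d
    · rw [if_pos hd, ih, List.mem_append, List.mem_singleton]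
      constructor
      · rintro ((hx | rfl) | ⟨e, he, hP, rfl⟩)
        · exact Or.inl hx
        · exact Or.inr ⟨d, List.mem_cons_self .., hd, rfl⟩
        · exact Or.inr ⟨e, List.mem_cons_of_mem _ he, hP, rfl⟩
      · rintro (hx | ⟨e, he, hP, rfl⟩)
        · exact Or.inl (Or.inl hx)
        · rcases List.mem_cons.mp he with rfl | he'
          · exact Or.inl (Or.inr rfl)
          · exact Or.inr ⟨e, he', hP, rfl⟩
    · rw [if_neg hd, ih]
      constructor
      · rintro (hx | ⟨e, he, hP, rfl⟩)
        · exact Or.inl hx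
        · exact Or.inr ⟨e, List.mem_cons_of_mem _ he, hP, rfl⟩
      · rintro (hx | ⟨e, he, hP, rfl⟩)
        · exact Or.inl hx
        · rcases List.mem_cons.mp he with rfl | he'
          · exact absurd hP hd
          · exact Or.inr ⟨e, he', hP, rfl⟩

lemma pvFoldAppendIf_len {α β : Type} (P : β → Prop) [DecidablePred P] (f : β → α) :
    ∀ (l : List β) (init : List α),
    (l.foldl (fun acc d => if P d then acc ++ [f d] else acc) init).length ≤
      init.length + l.length := by
  intro l
  induction l with
  | nil => simp
  | cons d rest ih =>
    intro init
    rw [List.foldl_cons]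
    by_cases hd : P d
    · rw [if_pos hd]
      calc _ ≤ (init ++ [f d]).length + rest.length := ih _
      _ ≤ init.length + (d :: rest).length := by simp; omega
    · rw [if_neg hd]
      calc _ ≤ init.length + rest.length := ih _
      _ ≤ init.length + (d :: rest).length := by simp

lemma pvPushes_eq (n m : Int) (grid : List (List Char)) (acc : List (List Bool)) (r c : Int) :
    pvPushes n m grid acc r c = pvDyDx.foldl (fun q (d : Int × Int) =>
      if (0 ≤ r + d.1 ∧ r + d.1 < n ∧ 0 ≤ c + d.2 ∧ c + d.2 < m) ∧
          pvGet2 acc false (r + d.1) (c + d.2) = false ∧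
          pvGet2 grid ' ' (r + d.1) (c + d.2) = '-'
      then q ++ [(r + d.1, c + d.2)] else q) [] := rfl

lemma pvPushes_mem {n m : Int} {grid : List (List Char)} {acc : List (List Bool)} {r c : Int}
    {x : Int × Int} :
    x ∈ pvPushes n m grid acc r c ↔
      ∃ d ∈ pvDyDx, x = (r + d.1, c + d.2) ∧ pvInB n m x ∧
        pvGet2 acc false x.1 x.2 = false ∧ pvGet2 grid ' ' x.1 x.2 = '-' := by
  rw [pvPushes_eq, pvFoldAppendIf_mem (fun d : Int × Int =>
    (0 ≤ r + d.1 ∧ r + d.1 < n ∧ 0 ≤ c + d.2 ∧ c + d.2 < m) ∧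
      pvGet2 acc false (r + d.1) (c + d.2) = false ∧
      pvGet2 grid ' ' (r + d.1) (c + d.2) = '-')
    (fun d : Int × Int => (r + d.1, c + d.2))]
  simp only [List.not_mem_nil, false_or]
  constructor
  · rintro ⟨d, hd, ⟨hb, hacc, hgr⟩, rfl⟩
    exact ⟨d, hd, rfl, by simpa [pvInB] using hb, hacc, hgr⟩
  · rintro ⟨d, hd, rfl, hb, hacc, hgr⟩
    exact ⟨d, hd, ⟨by simpa [pvInB] using hb, hacc, hgr⟩, rfl⟩

lemma pvPushes_len {n m : Int} {grid : List (List Char)} {acc : List (List Bool)} {r c : Int} :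
    (pvPushes n m grid acc r c).length ≤ 4 := by
  rw [pvPushes_eq]
  have h := pvFoldAppendIf_len (fun d : Int × Int =>
    (0 ≤ r + d.1 ∧ r + d.1 < n ∧ 0 ≤ c + d.2 ∧ c + d.2 < m) ∧
      pvGet2 acc false (r + d.1) (c + d.2) = false ∧
      pvGet2 grid ' ' (r + d.1) (c + d.2) = '-')
    (fun d : Int × Int => (r + d.1, c + d.2)) pvDyDx []
  simpa [pvDyDx] using h

-- ---------- the BFS characterization ----------
lemma pvBFS_done {n m : Int} {storage : List String} {R : List (Int × Int)}
    {base : (Int × Int) → Prop} {acc : List (List Bool)}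
    (hacc1 : ∀ p, pvInB n m p → pvGet2 acc false p.1 p.2 = true →
      pvReach n m storage R base p)
    (hacc2 : ∀ p, pvInB n m p → pvGet2 acc false p.1 p.2 = true →
      ∀ q', pvAdj p q' → pvInB n m q' → pvEmptyAt storage R q' →
        pvGet2 acc false q'.1 q'.2 = true)
    (hbase : ∀ p, base p → (pvInB n m p ∧ pvGet2 acc false p.1 p.2 = true)) :
    ∀ p, pvInB n m p →
      (pvGet2 acc false p.1 p.2 = true ↔ pvReach n m storage R base p) := by
  intro p hp
  constructor
  · exact hacc1 p hp
  · intro hr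
    have key : ∀ x, pvReach n m storage R base x →
        pvGet2 acc false x.1 x.2 = true ∧ pvInB n m x := by
      intro x hx
      induction hx with
      | base hb => exact ⟨(hbase _ hb).2, (hbase _ hb).1⟩
      | step _ hadj hin hemp ih =>
        exact ⟨hacc2 _ ih.2 ih.1 _ hadj hin hemp, hin⟩
    exact (key p hr).1

lemma pvBFS_spec {n m : Int} {storage : List String} (R : List (Int × Int))
    (grid : List (List Char)) (base : (Int × Int) → Prop)
    (hgrid : ∀ p, pvInB n m p → (pvGet2 grid ' ' p.1 p.2 = '-' ↔ pvEmptyAt storage R p)) :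
    ∀ (fuel : Nat) (acc : List (List Bool)) (q : List (Int × Int)),
    4 * pvFalseCount acc + q.length ≤ fuel →
    acc.length = n.toNat → (∀ r : Nat, r < n.toNat → (acc.getD r []).length = m.toNat) →
    (∀ p ∈ q, pvInB n m p) →
    (∀ p ∈ q, pvReach n m storage R base p) →
    (∀ p ∈ q, pvEmptyAt storage R p) →
    (∀ p, pvInB n m p → pvGet2 acc false p.1 p.2 = true → pvReach n m storage R base p) →
    (∀ p, pvInB n m p → pvGet2 acc false p.1 p.2 = true →
      ∀ q', pvAdj p q' → pvInB n m q' → pvEmptyAt storage R q' →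
        pvGet2 acc false q'.1 q'.2 = true ∨ q' ∈ q) →
    (∀ p, base p → (pvInB n m p ∧ (pvGet2 acc false p.1 p.2 = true ∨ p ∈ q))) →
    ((pvBFS n m grid fuel acc q).length = n.toNat ∧
     (∀ r : Nat, r < n.toNat → ((pvBFS n m grid fuel acc q).getD r []).length = m.toNat) ∧
     (∀ p, pvInB n m p → (pvGet2 (pvBFS n m grid fuel acc q) false p.1 p.2 = true ↔
        pvReach n m storage R base p))) := by
  intro fuel
  induction fuel with
  | zero =>
    intro acc q hfuel hlen hrow hq1 hq2 hq3 hacc1 hacc2 hbase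
    have hq : q = [] := by
      cases q with
      | nil => rfl
      | cons a l => simp at hfuel
    subst hq
    refine ⟨hlen, hrow, ?_⟩
    exact pvBFS_done hacc1
      (fun p hp hm q' ha hi he => (hacc2 p hp hm q' ha hi he).resolve_right (by simp))
      (fun p hb => ⟨(hbase p hb).1, (hbase p hb).2.resolve_right (by simp)⟩)
  | succ fuel ihf =>
    intro acc q hfuel hlen hrow hq1 hq2 hq3 hacc1 hacc2 hbase
    cases q with
    | nil =>
      refine ⟨hlen, hrow, ?_⟩
      exact pvBFS_done hacc1
        (fun p hp hm q' ha hi he => (hacc2 p hp hm q' ha hi he).resolve_right (by simp))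
        (fun p hb => ⟨(hbase p hb).1, (hbase p hb).2.resolve_right (by simp)⟩)
    | cons p q' =>
      have hpin := hq1 p (List.mem_cons_self ..)
      have heq : pvBFS n m grid (fuel + 1) acc (p :: q') =
          if pvGet2 acc false p.1 p.2 = true then pvBFS n m grid fuel acc q'
          else pvBFS n m grid fuel (pvSet2 acc p.1 p.2 true)
            (q' ++ pvPushes n m grid (pvSet2 acc p.1 p.2 true) p.1 p.2) := rfl
      rw [heq]
      by_cases hm : pvGet2 acc false p.1 p.2 = true
      · rw [if_pos hm]
        apply ihf acc q' (by simp at hfuel ⊢; omega) hlen hrow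
          (fun x hx => hq1 x (List.mem_cons_of_mem _ hx))
          (fun x hx => hq2 x (List.mem_cons_of_mem _ hx))
          (fun x hx => hq3 x (List.mem_cons_of_mem _ hx))
          hacc1
        · intro u hu hum v hadj hvin hve
          rcases hacc2 u hu hum v hadj hvin hve with hv | hv
          · exact Or.inl hv
          · rcases List.mem_cons.mp hv with rfl | hv'
            · exact Or.inl hm
            · exact Or.inr hv'
        · intro u hb
          obtain ⟨hu, hor⟩ := hbase u hb
          refine ⟨hu, ?_⟩
          rcases hor with hv | hv
          · exact Or.inl hv
          · rcases List.mem_cons.mp hv with rfl | hv'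
            · exact Or.inl hm
            · exact Or.inr hv'
      · rw [if_neg hm]
        have hmf : pvGet2 acc false p.1 p.2 = false := by simpa using hm
        obtain ⟨hp1, hp2, hp3, hp4⟩ := id hpin
        have hb1 : p.1.toNat < acc.length := by omega
        have hb2 : p.2.toNat < (acc.getD p.1.toNat []).length := by
          have := hrow p.1.toNat (by omega); omega
        have hlen2 : (pvSet2 acc p.1 p.2 true).length = n.toNat := by
          rw [length_pvSet2]; exact hlen
        have hrow2 : ∀ r : Nat, r < n.toNat →
            ((pvSet2 acc p.1 p.2 true).getD r []).length = m.toNat := by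
          intro r hr; rw [rowlen_pvSet2]; exact hrow r hr
        have hmark2 : ∀ u, pvInB n m u →
            (pvGet2 (pvSet2 acc p.1 p.2 true) false u.1 u.2 = true ↔
              u = p ∨ pvGet2 acc false u.1 u.2 = true) := by
          intro u hu
          by_cases hup : u = p
          · subst hup
            rw [pvGet2_pvSet2_self hb1 hb2]
            simp
          · rw [pvGet2_pvSet2_ne (pvInB_toNat_ne hu hpin hup)]
            simp [hup]
        have hfc := pvFalseCount_set2 hb1 hb2 hmf
        have hplen : (pvPushes n m grid (pvSet2 acc p.1 p.2 true) p.1 p.2).length ≤ 4 :=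
          pvPushes_len
        apply ihf (pvSet2 acc p.1 p.2 true)
          (q' ++ pvPushes n m grid (pvSet2 acc p.1 p.2 true) p.1 p.2)
          (by simp only [List.length_append, List.length_cons] at hfuel ⊢; omega)
          hlen2 hrow2
        · intro x hx
          rcases List.mem_append.mp hx with hx' | hx'
          · exact hq1 x (List.mem_cons_of_mem _ hx')
          · exact (pvPushes_mem.mp hx').choose_spec.2.2.1
        · intro x hx
          rcases List.mem_append.mp hx with hx' | hx'
          · exact hq2 x (List.mem_cons_of_mem _ hx')
          · obtain ⟨d, hd, hxe, hxin, _, hxg⟩ := pvPushes_mem.mp hx'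
            refine pvReach.step (hq2 p (List.mem_cons_self ..)) ?_ hxin
              ((hgrid x hxin).mp hxg)
            rw [pvAdj, pvNbrs_eq_dirs]
            exact hxe ▸ List.mem_map_of_mem hd
        · intro x hx
          rcases List.mem_append.mp hx with hx' | hx'
          · exact hq3 x (List.mem_cons_of_mem _ hx')
          · obtain ⟨d, hd, hxe, hxin, _, hxg⟩ := pvPushes_mem.mp hx'
            exact (hgrid x hxin).mp hxg
        · intro u hu hum
          rcases (hmark2 u hu).mp hum with rfl | hum'
          · exact hq2 u (List.mem_cons_self ..)
          · exact hacc1 u hu hum'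
        · intro u hu hum v hadj hvin hve
          rcases (hmark2 u hu).mp hum with rfl | hum'
          · by_cases hv : pvGet2 (pvSet2 acc u.1 u.2 true) false v.1 v.2 = true
            · exact Or.inl hv
            · refine Or.inr (List.mem_append.mpr (Or.inr ?_))
              rw [pvAdj, pvNbrs_eq_dirs] at hadj
              obtain ⟨d, hd, hvd⟩ := List.mem_map.mp hadj
              refine pvPushes_mem.mpr ⟨d, hd, hvd.symm, hvin, by simpa using hv,
                (hgrid v hvin).mpr hve⟩
          · rcases hacc2 u hu hum' v hadj hvin hve with hv | hv
            · exact Or.inl ((hmark2 v hvin).mpr (Or.inr hv))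
            · rcases List.mem_cons.mp hv with rfl | hv'
              · exact Or.inl ((hmark2 v hvin).mpr (Or.inl rfl))
              · exact Or.inr (List.mem_append.mpr (Or.inl hv'))
        · intro u hb
          obtain ⟨hu, hor⟩ := hbase u hb
          refine ⟨hu, ?_⟩
          rcases hor with hv | hv
          · exact Or.inl ((hmark2 u hu).mpr (Or.inr hv))
          · rcases List.mem_cons.mp hv with rfl | hv'
            · exact Or.inl ((hmark2 u hu).mpr (Or.inl rfl))
            · exact Or.inr (List.mem_append.mpr (Or.inl hv'))

-- ---------- the sweep characterization ----------
def pvSweepStep (n m : Int) (storage : List String) (removed : PySem.Set (Int × Int))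
    (st : PySem.Set (Int × Int) × Bool) (p : Int × Int) : PySem.Set (Int × Int) × Bool :=
  if !PySem.Set.contains st.1 p &&
      (PySem.Set.contains removed p || pvOrig storage p.1 p.2 == '-') &&
      pvNearAcc n m st.1 p.1 p.2
  then (PySem.Set.add st.1 p, true) else st

def pvQual (n m : Int) (storage : List String) (removed : PySem.Set (Int × Int))
    (acc : PySem.Set (Int × Int)) (p : Int × Int) : Bool :=
  !PySem.Set.contains acc p &&
    (PySem.Set.contains removed p || pvOrig storage p.1 p.2 == '-') &&
    pvNearAcc n m acc p.1 p.2

lemma pvSweepStep_eq (n m : Int) (storage : List String) (removed : PySem.Set (Int × Int))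
    (st : PySem.Set (Int × Int) × Bool) (p : Int × Int) :
    pvSweepStep n m storage removed st p =
      if pvQual n m storage removed st.1 p = true then (PySem.Set.add st.1 p, true) else st := rfl

lemma pvSweep_eq (n m : Int) (storage : List String) (removed acc0 : PySem.Set (Int × Int)) :
    pvSweep n m storage removed acc0 =
      (pvCells n m).foldl (pvSweepStep n m storage removed) (acc0, false) := by
  rw [pvSweep, pvCells, List.foldl_flatMap]
  simp only [List.foldl_map]
  rfl

lemma pvSetAdd_length_ge {s : PySem.Set (Int × Int)} (x : Int × Int) :
    s.length ≤ (PySem.Set.add s x).length := by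
  rw [PySem.Set.add_eq_ite]
  split <;> simp

lemma pvSetAdd_length_not_mem {s : PySem.Set (Int × Int)} {x : Int × Int} (h : x ∉ s) :
    (PySem.Set.add s x).length = s.length + 1 := by
  rw [PySem.Set.add_of_not_mem h]
  simp

lemma pvSweepFold_basic (n m : Int) (storage : List String) (removed : PySem.Set (Int × Int)) :
    ∀ (l : List (Int × Int)) (st : PySem.Set (Int × Int) × Bool),
    (∀ x ∈ st.1, x ∈ (l.foldl (pvSweepStep n m storage removed) st).1) ∧
    (st.1.Nodup → (l.foldl (pvSweepStep n m storage removed) st).1.Nodup) ∧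
    (∀ x ∈ (l.foldl (pvSweepStep n m storage removed) st).1, x ∈ st.1 ∨ x ∈ l) ∧
    (st.2 = true → (l.foldl (pvSweepStep n m storage removed) st).2 = true) ∧
    st.1.length ≤ (l.foldl (pvSweepStep n m storage removed) st).1.length := by
  intro l
  induction l with
  | nil => intro st; exact ⟨fun x hx => hx, fun h => h, fun x hx => Or.inl hx, fun h => h, le_rfl⟩
  | cons p rest ih =>
    intro st
    rw [List.foldl_cons, pvSweepStep_eq]
    by_cases hq : pvQual n m storage removed st.1 p = true
    · rw [if_pos hq]
      obtain ⟨ih1, ih2, ih3, ih4, ih5⟩ := ih (PySem.Set.add st.1 p, true)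
      refine ⟨?_, ?_, ?_, fun _ => ih4 rfl, ?_⟩
      · intro x hx
        exact ih1 x ((PySem.Set.mem_add st.1 p x).mpr (Or.inl hx))
      · intro hnd
        exact ih2 (PySem.Set.nodup_add st.1 p hnd)
      · intro x hx
        rcases ih3 x hx with hx' | hx'
        · rcases (PySem.Set.mem_add st.1 p x).mp hx' with h | rfl
          · exact Or.inl h
          · exact Or.inr (List.mem_cons_self ..)
        · exact Or.inr (List.mem_cons_of_mem _ hx')
      · calc st.1.length ≤ (PySem.Set.add st.1 p).length := pvSetAdd_length_ge p
        _ ≤ _ := ih5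
    · rw [if_neg hq]
      obtain ⟨ih1, ih2, ih3, ih4, ih5⟩ := ih st
      exact ⟨ih1, ih2, fun x hx => (ih3 x hx).imp id (List.mem_cons_of_mem _), ih4, ih5⟩

lemma pvSweepFold_reach {n m : Int} {storage : List String} {R : List (Int × Int)}
    {removed : PySem.Set (Int × Int)} {base : (Int × Int) → Prop}
    (hrem : ∀ p, pvEmptyAt storage R p ↔
      (PySem.Set.contains removed p || pvOrig storage p.1 p.2 == '-') = true) :
    ∀ (l : List (Int × Int)) (st : PySem.Set (Int × Int) × Bool),
    (∀ p ∈ st.1, pvReach n m storage R base p) → (∀ p ∈ l, pvInB n m p) →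
    ∀ p ∈ (l.foldl (pvSweepStep n m storage removed) st).1, pvReach n m storage R base p := by
  intro l
  induction l with
  | nil => intro st hS _; exact hS
  | cons p rest ih =>
    intro st hS hl
    rw [List.foldl_cons, pvSweepStep_eq]
    by_cases hq : pvQual n m storage removed st.1 p = true
    · rw [if_pos hq]
      apply ih _ _ (fun x hx => hl x (List.mem_cons_of_mem _ hx))
      intro x hx
      rcases (PySem.Set.mem_add st.1 p x).mp hx with h | rfl
      · exact hS x h
      · rw [pvQual, Bool.and_eq_true, Bool.and_eq_true] at hq
        obtain ⟨⟨_, hemp⟩, hnear⟩ := hq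
        obtain ⟨v, hv, hvin, hvacc⟩ := (pvNearAcc_iff x.1 x.2).mp hnear
        exact pvReach.step (hS v hvacc) (pvAdj_symm hv) (hl x (List.mem_cons_self ..))
          ((hrem x).mpr hemp)
    · rw [if_neg hq]
      exact ih _ hS (fun x hx => hl x (List.mem_cons_of_mem _ hx))

lemma pvSweepFold_false (n m : Int) (storage : List String) (removed : PySem.Set (Int × Int)) :
    ∀ (l : List (Int × Int)) (st : PySem.Set (Int × Int) × Bool),
    (l.foldl (pvSweepStep n m storage removed) st).2 = false →
    ((l.foldl (pvSweepStep n m storage removed) st).1 = st.1 ∧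
      ∀ p ∈ l, pvQual n m storage removed st.1 p = false) := by
  intro l
  induction l with
  | nil => intro st _; exact ⟨rfl, by simp⟩
  | cons p rest ih =>
    intro st hfl
    rw [List.foldl_cons, pvSweepStep_eq] at hfl ⊢
    by_cases hq : pvQual n m storage removed st.1 p = true
    · rw [if_pos hq] at hfl
      have := ((pvSweepFold_basic n m storage removed rest (PySem.Set.add st.1 p, true)).2.2.2.1) rfl
      rw [this] at hfl
      cases hfl
    · rw [if_neg hq] at hfl ⊢
      obtain ⟨h1, h2⟩ := ih st hfl
      refine ⟨h1, ?_⟩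
      intro x hx
      rcases List.mem_cons.mp hx with rfl | hx'
      · simpa using hq
      · exact h2 x hx'

lemma pvSweepFold_grow (n m : Int) (storage : List String) (removed : PySem.Set (Int × Int)) :
    ∀ (l : List (Int × Int)) (st : PySem.Set (Int × Int) × Bool),
    st.1.Nodup → st.2 = false → (l.foldl (pvSweepStep n m storage removed) st).2 = true →
    st.1.length < (l.foldl (pvSweepStep n m storage removed) st).1.length := by
  intro l
  induction l with
  | nil =>
    intro st _ h1 h2
    rw [List.foldl_nil] at h2
    rw [h1] at h2
    cases h2
  | cons p rest ih =>
    intro st hnd h1 h2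
    rw [List.foldl_cons, pvSweepStep_eq] at h2 ⊢
    by_cases hq : pvQual n m storage removed st.1 p = true
    · rw [if_pos hq]
      have hnotmem : p ∉ st.1 := by
        rw [pvQual, Bool.and_eq_true, Bool.and_eq_true] at hq
        have hcon := hq.1.1
        simp only [Bool.not_eq_true'] at hcon
        intro hmem
        rw [(PySem.Set.contains_iff st.1 p).mpr hmem] at hcon
        cases hcon
      have hlen := pvSetAdd_length_not_mem hnotmem
      have hmono : (PySem.Set.add st.1 p).length ≤
          (List.foldl (pvSweepStep n m storage removed) (PySem.Set.add st.1 p, true) rest).1.length :=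
        (pvSweepFold_basic n m storage removed rest (PySem.Set.add st.1 p, true)).2.2.2.2
      omega
    · rw [if_neg hq] at h2 ⊢
      exact ih st hnd h1 h2

lemma pvSweepLoop_spec {n m : Int} {storage : List String} {R : List (Int × Int)}
    {removed : PySem.Set (Int × Int)} {base : (Int × Int) → Prop}
    (hrem : ∀ p, pvEmptyAt storage R p ↔
      (PySem.Set.contains removed p || pvOrig storage p.1 p.2 == '-') = true) :
    ∀ (fuel : Nat) (acc : PySem.Set (Int × Int)),
    n.toNat * m.toNat + 1 ≤ fuel + acc.length →
    acc.Nodup → (∀ p ∈ acc, pvInB n m p) →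
    (∀ p ∈ acc, pvReach n m storage R base p) →
    (∀ p, base p → p ∈ acc) →
    ((pvSweepLoop n m storage removed fuel acc).Nodup ∧
     (∀ p ∈ pvSweepLoop n m storage removed fuel acc, pvInB n m p) ∧
     (∀ p, p ∈ pvSweepLoop n m storage removed fuel acc ↔
        pvReach n m storage R base p)) := by
  intro fuel
  induction fuel with
  | zero =>
    intro acc hfuel hnd hin _ _
    have hle : acc.length ≤ (pvCells n m).length :=
      pvNodup_length_le hnd (fun x hx => mem_pvCells.mpr (hin x hx))
    rw [length_pvCells] at hle
    omega
  | succ fuel ih =>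
    intro acc hfuel hnd hin hS hbase
    have heq : pvSweepLoop n m storage removed (fuel + 1) acc =
        if (pvSweep n m storage removed acc).2 = true
        then pvSweepLoop n m storage removed fuel (pvSweep n m storage removed acc).1
        else (pvSweep n m storage removed acc).1 := rfl
    rw [heq, pvSweep_eq]
    obtain ⟨b1, b2, b3, _, b5⟩ := pvSweepFold_basic n m storage removed (pvCells n m) (acc, false)
    by_cases hch : ((pvCells n m).foldl (pvSweepStep n m storage removed) (acc, false)).2 = true
    · rw [if_pos hch]
      have hgrow : acc.length <
          ((pvCells n m).foldl (pvSweepStep n m storage removed) (acc, false)).1.length :=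
        pvSweepFold_grow n m storage removed (pvCells n m) (acc, false) hnd rfl hch
      apply ih
      · omega
      · exact b2 hnd
      · intro p hp
        rcases b3 p hp with h | h
        · exact hin p h
        · exact mem_pvCells.mp h
      · exact pvSweepFold_reach hrem (pvCells n m) (acc, false) hS (fun p hp => mem_pvCells.mp hp)
      · intro p hp
        exact b1 p (hbase p hp)
    · rw [if_neg hch]
      have hch' : ((pvCells n m).foldl (pvSweepStep n m storage removed) (acc, false)).2 = false := by
        simpa using hch
      obtain ⟨hfix, hqual⟩ := pvSweepFold_false n m storage removed (pvCells n m) (acc, false) hch'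
      rw [hfix]
      refine ⟨hnd, hin, ?_⟩
      intro p
      constructor
      · exact hS p
      · intro hr
        have key : ∀ x, pvReach n m storage R base x → x ∈ acc := by
          intro x hx
          induction hx with
          | base hb => exact hbase _ hb
          | step hq hadj hxin hxemp ihx =>
            rename_i q x
            by_cases hmem : x ∈ acc
            · exact hmem
            · exfalso
              have hcell : x ∈ pvCells n m := mem_pvCells.mpr hxin
              have hqf := hqual x hcell
              rw [pvQual] at hqf
              have hc1 : PySem.Set.contains acc x = false := by
                rcases Bool.eq_false_or_eq_true (PySem.Set.contains acc x) with h' | h'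
                · exact absurd ((PySem.Set.contains_iff acc x).mp h') hmem
                · exact h'
              have hc2 : (PySem.Set.contains removed x || pvOrig storage x.1 x.2 == '-') = true :=
                (hrem x).mp hxemp
              have hc3 : pvNearAcc n m acc x.1 x.2 = true := by
                rw [pvNearAcc_iff]
                exact ⟨_, pvAdj_symm hadj, hin _ ihx, ihx⟩
              rw [hc1, hc2, hc3] at hqf
              simp at hqf
        exact key p hr


-- ---------- pend characterization ----------
lemma pvPend0_mem {n m : Int} {storage : List String} {R : PySem.Set (Int × Int)} {t : Char}
    {p : Int × Int} :
    (p ∈ (PySem.List.pyRange 0 n 1).flatMap fun r =>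
      ((PySem.List.pyRange 0 m 1).filter fun c =>
        pvOrig storage r c == t && !PySem.Set.contains R (r, c)).map fun c => (r, c)) ↔
      (pvInB n m p ∧ pvOrig storage p.1 p.2 = t ∧ p ∉ R) := by
  obtain ⟨a, b⟩ := p
  simp only [List.mem_flatMap, List.mem_map, List.mem_filter, PySem.List.mem_pyRange_one,
    Bool.and_eq_true, beq_iff_eq, Bool.not_eq_true']
  constructor
  · rintro ⟨r, hr, c, ⟨hc, horig, hcon⟩, heq⟩
    cases heq
    refine ⟨⟨hr.1, hr.2, hc.1, hc.2⟩, horig, ?_⟩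
    intro hmem
    rw [(PySem.Set.contains_iff R (a, b)).mpr hmem] at hcon
    cases hcon
  · rintro ⟨⟨h1, h2, h3, h4⟩, horig, hmem⟩
    refine ⟨a, ⟨h1, h2⟩, b, ⟨⟨h3, h4⟩, horig, ?_⟩, rfl⟩
    rcases Bool.eq_false_or_eq_true (PySem.Set.contains R (a, b)) with h | h
    · exact absurd ((PySem.Set.contains_iff R (a, b)).mp h) hmem
    · exact h

lemma pvPend0_nodup {n m : Int} {storage : List String} {R : PySem.Set (Int × Int)} {t : Char} :
    ((PySem.List.pyRange 0 n 1).flatMap fun r =>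
      ((PySem.List.pyRange 0 m 1).filter fun c =>
        pvOrig storage r c == t && !PySem.Set.contains R (r, c)).map fun c => (r, c)).Nodup := by
  rw [List.nodup_flatMap]
  constructor
  · intro r _
    exact (((PySem.List.nodup_pyRange_one 0 m)).filter _).map
      (fun a b h => (Prod.mk.injEq .. ▸ h).2)
  · refine (PySem.List.nodup_pyRange_one 0 n).imp ?_
    intro r1 r2 hne
    simp only [Function.onFun, List.disjoint_left, List.mem_map]
    rintro x ⟨c1, _, rfl⟩ ⟨c2, _, hx⟩
    exact hne ((Prod.mk.injEq .. ▸ hx).1.symm)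

lemma pvUpdate_length {s : PySem.Set (Int × Int)} {l : List (Int × Int)} (hs : s.Nodup)
    (hl : l.Nodup) (hd : ∀ p ∈ l, p ∉ s) :
    (PySem.Set.update s l).length = s.length + l.length := by
  induction l generalizing s with
  | nil => simp [PySem.Set.update]
  | cons x rest ih =>
    have hstep : PySem.Set.update s (x :: rest) = PySem.Set.update (PySem.Set.add s x) rest := rfl
    rw [hstep]
    have hx : x ∉ s := hd x (List.mem_cons_self ..)
    have hadd := PySem.Set.add_of_not_mem hx
    have hlen : (PySem.Set.add s x).length = s.length + 1 := by rw [hadd]; simp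
    rw [ih (PySem.Set.nodup_add s x hs) (List.Nodup.of_cons hl) ?_, hlen]
    · simp [List.length_cons]; omega
    · intro p hp
      rw [PySem.Set.mem_add]
      rintro (hmem | rfl)
      · exact hd p (List.mem_cons_of_mem _ hp) hmem
      · exact (List.nodup_cons.mp hl).1 hp

-- ---------- the per-request step ----------
lemma pvEmpty_bool {storage : List String} {R2 : PySem.Set (Int × Int)} (p : Int × Int) :
    pvEmptyAt storage R2 p ↔
      (PySem.Set.contains R2 p || pvOrig storage p.1 p.2 == '-') = true := by
  rw [pvEmptyAt, Bool.or_eq_true, beq_iff_eq]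
  constructor
  · rintro (h | h)
    · exact Or.inl ((PySem.Set.contains_iff R2 p).mpr h)
    · exact Or.inr h
  · rintro (h | h)
    · exact Or.inl ((PySem.Set.contains_iff R2 p).mp h)
    · exact Or.inr h

lemma pvRow_map_toList (storage : List String) (i : Nat) :
    (storage.map String.toList).getD i [] = (storage.getD i "").toList := by
  have h : ([] : List Char) = "".toList := rfl
  rw [h, List.getD_map]

lemma pvGet2_replicate_false (a b : Nat) (r c : Int) :
    pvGet2 (List.replicate a (List.replicate b false)) false r c = false := by
  rw [pvGet2]
  have hrow : (List.replicate a (List.replicate b false)).getD r.toNat [] = [] ∨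
      (List.replicate a (List.replicate b false)).getD r.toNat [] = List.replicate b false := by
    by_cases hr : r.toNat < a
    · right
      rw [List.getD_eq_getElem?_getD,
        List.getElem?_eq_getElem (by simp only [List.length_replicate]; omega)]
      simp
    · left
      rw [List.getD_eq_getElem?_getD,
        List.getElem?_eq_none (by simp only [List.length_replicate]; omega)]
      rfl
  rcases hrow with h | h <;> rw [h]
  · simp
  · by_cases hc : c.toNat < b
    · rw [List.getD_eq_getElem?_getD,
        List.getElem?_eq_getElem (by simp only [List.length_replicate]; omega)]
      simp
    · rw [List.getD_eq_getElem?_getD,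
        List.getElem?_eq_none (by simp only [List.length_replicate]; omega)]
      rfl

lemma pvStep_inv {n m : Int} {storage : List String}
    {stA : List (List Char) × PySem.Dict Char (PySem.Set (Int × Int)) × Int × List (List Bool)}
    {stB : PySem.Set (Int × Int) × PySem.Set (Int × Int)} (req : String)
    (hmrow : ∀ r : Nat, r < n.toNat → m.toNat ≤ (storage.getD r "").toList.length)
    (inv : pvInv n m storage stA stB) :
    pvInv n m storage (pvStepA n m stA req) (pvStepB n m storage stB req) := by
  obtain ⟨g, l, rm, aT⟩ := stA
  obtain ⟨R, Acc⟩ := stB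
  set t := req.toList.headD ' ' with htdef
  set coords : List (Int × Int) := l.getD t PySem.Set.empty with hcodef
  set pend0 : List (Int × Int) := (PySem.List.pyRange 0 n 1).flatMap (fun r =>
    ((PySem.List.pyRange 0 m 1).filter fun c =>
      pvOrig storage r c == t && !PySem.Set.contains R (r, c)).map fun c => (r, c)) with hp0def
  set pend : List (Int × Int) :=
    (if req.toList.length = 1 then pend0.filter (fun p => pvExposed n m Acc p.1 p.2) else pend0)
    with hpenddef
  set seeds : List (Int × Int) := pend.filter (fun p => pvExposed n m Acc p.1 p.2) with hseedsdef
  set R2 : PySem.Set (Int × Int) := PySem.Set.update R pend with hR2def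
  set acc2 : PySem.Set (Int × Int) := PySem.Set.update Acc seeds with hacc2def
  set F : PySem.Set (Int × Int) :=
    pvSweepLoop n m storage R2 (n.toNat * m.toNat + 1) acc2 with hFdef
  have hB : pvStepB n m storage (R, Acc) req = (R2, F) := rfl
  set resA := (if req.toList.length = 1
    then coords.foldl (pvForkStep n m aT) (g, PySem.Set.empty, ([] : List (Int × Int)))
    else coords.foldl (pvCraneStep n m aT) (g, PySem.Set.empty, [])) with hresdef
  have hA : pvStepA n m (g, l, rm, aT) req =
      (resA.1,
       (if resA.2.1.isEmpty then l
        else l.modify t PySem.Set.empty fun s => PySem.Set.diff s resA.2.1),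
       (if resA.2.1.isEmpty then rm else rm - resA.2.1.length),
       pvBFS n m resA.1 (resA.2.2.length + 4 * (n.toNat * m.toNat) + 1) aT resA.2.2) := rfl
  rw [hA, hB]
  have hcoords_mem : ∀ p, p ∈ coords ↔
      (pvInB n m p ∧ pvOrig storage p.1 p.2 = t ∧ p ∉ R) := fun p => inv.lval t p
  have hcoin : ∀ p ∈ coords, pvInB n m p := fun p hp => ((hcoords_mem p).mp hp).1
  have hg1 : n.toNat ≤ g.length := le_of_eq inv.glen.symm
  have hg2 : ∀ r : Nat, r < n.toNat → m.toNat ≤ (g.getD r []).length := by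
    intro r hr
    have hgrow := inv.grow r hr
    rw [hgrow]
    exact hmrow r hr
  have hexp_iff : ∀ p : Int × Int, pvExposed n m Acc p.1 p.2 = true ↔ pvExpP n m Acc p := by
    intro p
    simpa using pvExposed_iff (n := n) (m := m) (Acc := Acc) p.1 p.2
  have hfork_iff : ∀ p : Int × Int, pvForklift n m aT p.1 p.2 = true ↔ pvExpP n m Acc p := by
    intro p
    have haval : ∀ u : Int × Int, pvInB n m u →
        (pvGet2 aT false u.1 u.2 = true ↔ u ∈ Acc) := fun u hu => inv.aval u hu
    simpa using pvForklift_iff haval p.1 p.2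
  have hpend0_mem : ∀ p : Int × Int, p ∈ pend0 ↔
      (pvInB n m p ∧ pvOrig storage p.1 p.2 = t ∧ p ∉ R) := fun p => pvPend0_mem
  have hpend_mem : ∀ p, p ∈ pend ↔
      ((pvInB n m p ∧ pvOrig storage p.1 p.2 = t ∧ p ∉ R) ∧
        (req.toList.length = 1 → pvExpP n m Acc p)) := by
    intro p
    rw [hpenddef]
    by_cases h1 : req.toList.length = 1
    · rw [if_pos h1]
      simp only [List.mem_filter]
      rw [hpend0_mem p, hexp_iff p]
      constructor
      · rintro ⟨hc, he⟩; exact ⟨hc, fun _ => he⟩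
      · rintro ⟨hc, he⟩; exact ⟨hc, he h1⟩
    · rw [if_neg h1, hpend0_mem p]
      constructor
      · intro hc; exact ⟨hc, fun h => absurd h h1⟩
      · rintro ⟨hc, _⟩; exact hc
  have hpend_nd : pend.Nodup := by
    rw [hpenddef]
    by_cases h1 : req.toList.length = 1
    · rw [if_pos h1]; exact pvPend0_nodup.filter _
    · rw [if_neg h1]; exact pvPend0_nodup
  have hseeds_mem : ∀ p, p ∈ seeds ↔ (p ∈ pend ∧ pvExpP n m Acc p) := by
    intro p
    rw [hseedsdef]
    simp only [List.mem_filter]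
    rw [hexp_iff p]
  obtain ⟨hf1, hf2, hf3, hf4, hf5, hf6⟩ :
      resA.1.length = g.length ∧
      (∀ i : Nat, ((resA.1.getD i []).length = (g.getD i []).length)) ∧
      resA.2.1.Nodup ∧
      (∀ p, p ∈ resA.2.1 ↔ p ∈ pend) ∧
      (∀ p, p ∈ resA.2.2 ↔ p ∈ seeds) ∧
      (∀ p, pvInB n m p → pvGet2 resA.1 ' ' p.1 p.2 =
        (if p ∈ pend then '-' else pvGet2 g ' ' p.1 p.2)) := by
    by_cases h1 : req.toList.length = 1
    · rw [hresdef, if_pos h1]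
      obtain ⟨k1, k2, k3, k4, k5, k6⟩ :=
        pvForkFold aT coords g PySem.Set.empty [] hcoin hg1 hg2
      have hcond : ∀ p : Int × Int,
          (p ∈ coords ∧ pvForklift n m aT p.1 p.2 = true) ↔ p ∈ pend := by
        intro p
        rw [hcoords_mem p, hfork_iff p, hpend_mem p]
        constructor
        · rintro ⟨hc, he⟩; exact ⟨hc, fun _ => he⟩
        · rintro ⟨hc, he⟩; exact ⟨hc, he h1⟩
      refine ⟨k1, k2, k3 (by simp [PySem.Set.empty]), ?_, ?_, ?_⟩
      · intro p
        rw [k4 p, hcond p]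
        simp [PySem.Set.empty]
      · intro p
        rw [k5 p]
        simp only [List.not_mem_nil, false_or]
        rw [hcond p, hseeds_mem p]
        constructor
        · intro hp
          refine ⟨hp, ?_⟩
          exact ((hpend_mem p).mp hp).2 h1
        · rintro ⟨hp, _⟩; exact hp
      · intro p hp
        rw [k6 p hp, if_congr (hcond p) rfl rfl]
    · rw [hresdef, if_neg h1]
      obtain ⟨k1, k2, k3, k4, k5, k6⟩ :=
        pvCraneFold aT coords g PySem.Set.empty [] hcoin hg1 hg2
      have hcond : ∀ p : Int × Int, p ∈ coords ↔ p ∈ pend := by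
        intro p
        rw [hcoords_mem p, hpend_mem p]
        constructor
        · intro hc; exact ⟨hc, fun h => absurd h h1⟩
        · rintro ⟨hc, _⟩; exact hc
      have hcondq : ∀ p : Int × Int,
          (p ∈ coords ∧ pvForklift n m aT p.1 p.2 = true) ↔ p ∈ seeds := by
        intro p
        rw [hcond p, hfork_iff p, hseeds_mem p]
      refine ⟨k1, k2, k3 (by simp [PySem.Set.empty]), ?_, ?_, ?_⟩
      · intro p
        rw [k4 p, hcond p]
        simp [PySem.Set.empty]
      · intro p
        rw [k5 p]
        simp only [List.not_mem_nil, false_or]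
        rw [hcondq p]
      · intro p hp
        rw [k6 p hp, if_congr (hcond p) rfl rfl]
  have hpendR : ∀ p ∈ pend, p ∉ R := fun p hp => ((hpend_mem p).mp hp).1.2.2
  have hpendIn : ∀ p ∈ pend, pvInB n m p := fun p hp => ((hpend_mem p).mp hp).1.1
  have hpendOrig : ∀ p ∈ pend, pvOrig storage p.1 p.2 = t :=
    fun p hp => ((hpend_mem p).mp hp).1.2.1
  have hR2mem : ∀ p, p ∈ R2 ↔ p ∈ R ∨ p ∈ pend := by
    intro p
    rw [hR2def]
    exact PySem.Set.mem_update R pend p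
  have hR2nd : R2.Nodup := PySem.Set.nodup_update R pend inv.Rnd
  have hR2in : ∀ p ∈ R2, pvInB n m p := by
    intro p hp
    rcases (hR2mem p).mp hp with h | h
    · exact inv.Rin p h
    · exact hpendIn p h
  have hR2len : R2.length = R.length + pend.length := pvUpdate_length inv.Rnd hpend_nd hpendR
  have hremdAlen : resA.2.1.length = pend.length :=
    ((List.perm_ext_iff_of_nodup hf3 hpend_nd).mpr hf4).length_eq
  have hEmptyMono : ∀ p, pvEmptyAt storage R p → pvEmptyAt storage R2 p := by
    intro p hp
    rcases hp with h | h
    · exact Or.inl ((hR2mem p).mpr (Or.inl h))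
    · exact Or.inr h
  have hacc2mem : ∀ p, p ∈ acc2 ↔ p ∈ Acc ∨ p ∈ seeds := by
    intro p
    rw [hacc2def]
    exact PySem.Set.mem_update Acc seeds p
  have hacc2nd : acc2.Nodup := PySem.Set.nodup_update Acc seeds inv.And
  have hacc2in : ∀ p ∈ acc2, pvInB n m p := by
    intro p hp
    rcases (hacc2mem p).mp hp with h | h
    · exact inv.Ain p h
    · exact hpendIn p ((hseeds_mem p).mp h).1
  have hrem2 : ∀ p, pvEmptyAt storage R2 p ↔
      (PySem.Set.contains R2 p || pvOrig storage p.1 p.2 == '-') = true :=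
    fun p => pvEmpty_bool p
  obtain ⟨hFnd, hFin, hFmem⟩ :=
    pvSweepLoop_spec (base := fun p => p ∈ acc2) hrem2 (n.toNat * m.toNat + 1) acc2
      (by omega) hacc2nd hacc2in (fun p hp => pvReach.base hp) (fun p hp => hp)
  have hgridBFS : ∀ p, pvInB n m p →
      (pvGet2 resA.1 ' ' p.1 p.2 = '-' ↔ pvEmptyAt storage R2 p) := by
    intro p hp
    rw [hf6 p hp]
    by_cases hpd : p ∈ pend
    · rw [if_pos hpd]
      exact ⟨fun _ => Or.inl ((hR2mem p).mpr (Or.inr hpd)), fun _ => rfl⟩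
    · rw [if_neg hpd, inv.gval p hp]
      by_cases hpr : p ∈ R
      · rw [if_pos hpr]
        exact ⟨fun _ => Or.inl ((hR2mem p).mpr (Or.inl hpr)), fun _ => rfl⟩
      · rw [if_neg hpr]
        constructor
        · intro h; exact Or.inr h
        · intro h
          rcases h with h | h
          · rcases (hR2mem p).mp h with h' | h'
            · exact absurd h' hpr
            · exact absurd h' hpd
          · exact h
  have hfc : pvFalseCount aT ≤ n.toNat * m.toNat :=
    pvFalseCount_le (n := n) (m := m) (acc := aT) inv.alen inv.arow
  have hqA_seed : ∀ p ∈ resA.2.2, p ∈ seeds := fun p hp => (hf5 p).mp hp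
  have hqA_in : ∀ p ∈ resA.2.2, pvInB n m p :=
    fun p hp => hpendIn p ((hseeds_mem p).mp (hqA_seed p hp)).1
  have hacc2' : ∀ u, pvInB n m u → pvGet2 aT false u.1 u.2 = true →
      ∀ v, pvAdj u v → pvInB n m v → pvEmptyAt storage R2 v →
        pvGet2 aT false v.1 v.2 = true ∨ v ∈ resA.2.2 := by
    intro u hu hum v hadj hvin hve
    have huAcc : u ∈ Acc := (inv.aval u hu).mp hum
    by_cases hvE : pvEmptyAt storage R v
    · have hvAcc : v ∈ Acc := inv.Acl u huAcc v hadj hvin hvE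
      exact Or.inl ((inv.aval v hvin).mpr hvAcc)
    · have hvpend : v ∈ pend := by
        rcases hve with h | h
        · rcases (hR2mem v).mp h with h' | h'
          · exact absurd (Or.inl h') hvE
          · exact h'
        · exact absurd (Or.inr h) hvE
      have hvexp : pvExpP n m Acc v := ⟨u, pvAdj_symm hadj, Or.inr huAcc⟩
      exact Or.inr ((hf5 v).mpr ((hseeds_mem v).mpr ⟨hvpend, hvexp⟩))
  have hbase' : ∀ p, p ∈ acc2 →
      (pvInB n m p ∧ (pvGet2 aT false p.1 p.2 = true ∨ p ∈ resA.2.2)) := by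
    intro p hp
    rcases (hacc2mem p).mp hp with h | h
    · exact ⟨inv.Ain p h, Or.inl ((inv.aval p (inv.Ain p h)).mpr h)⟩
    · exact ⟨hpendIn p ((hseeds_mem p).mp h).1, Or.inr ((hf5 p).mpr h)⟩
  obtain ⟨hAlen, hArow, hAmem⟩ :=
    pvBFS_spec (storage := storage) R2 resA.1 (fun p => p ∈ acc2) hgridBFS
      (resA.2.2.length + 4 * (n.toNat * m.toNat) + 1) aT resA.2.2
      (by omega) inv.alen inv.arow hqA_in
      (fun p hp => pvReach.base ((hacc2mem p).mpr (Or.inr (hqA_seed p hp))))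
      (fun p hp => Or.inl ((hR2mem p).mpr (Or.inr ((hseeds_mem p).mp (hqA_seed p hp)).1)))
      (fun p hp hm => pvReach.base ((hacc2mem p).mpr (Or.inl ((inv.aval p hp).mp hm))))
      hacc2' hbase'
  have hrem' : (if resA.2.1.isEmpty then rm else rm - (resA.2.1.length : Int)) =
      n * m - (R2.length : Int) := by
    have hR : rm = n * m - (R.length : Int) := inv.rem
    by_cases hE : resA.2.1.isEmpty
    · rw [if_pos hE]
      have hnilA : resA.2.1 = [] := List.isEmpty_iff.mp hE
      have hnil : pend = [] := by
        refine List.eq_nil_iff_forall_not_mem.mpr ?_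
        intro p hp
        have := (hf4 p).mpr hp
        rw [hnilA] at this
        simp at this
      rw [hR, hR2len, hnil]
      simp
    · rw [if_neg hE, hR, hR2len, hremdAlen]
      push_cast
      ring
  have hloc' : ∀ (t' : Char) (p : Int × Int),
      (p ∈ (if resA.2.1.isEmpty then l
        else l.modify t PySem.Set.empty fun s => PySem.Set.diff s resA.2.1).getD t'
        PySem.Set.empty) ↔
      (pvInB n m p ∧ pvOrig storage p.1 p.2 = t' ∧ p ∉ R2) := by
    intro t' p
    by_cases hE : resA.2.1.isEmpty
    · rw [if_pos hE]
      have hnilA : resA.2.1 = [] := List.isEmpty_iff.mp hE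
      have hnil : pend = [] := by
        refine List.eq_nil_iff_forall_not_mem.mpr ?_
        intro x hx
        have := (hf4 x).mpr hx
        rw [hnilA] at this
        simp at this
      have hR2R : ∀ x : Int × Int, x ∈ R2 ↔ x ∈ R := by
        intro x
        rw [hR2mem x, hnil]
        simp
      rw [inv.lval t' p]
      constructor
      · rintro ⟨h1, h2, h3⟩
        exact ⟨h1, h2, fun hx => h3 ((hR2R p).mp hx)⟩
      · rintro ⟨h1, h2, h3⟩
        exact ⟨h1, h2, fun hx => h3 ((hR2R p).mpr hx)⟩
    · rw [if_neg hE, PySem.Dict.getD_modify]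
      by_cases ht' : t' = t
      · rw [if_pos ht']
        subst ht'
        rw [PySem.Set.mem_diff]
        rw [inv.lval t p]
        constructor
        · rintro ⟨⟨h1, h2, h3⟩, h4⟩
          refine ⟨h1, h2, ?_⟩
          intro hx
          rcases (hR2mem p).mp hx with h' | h'
          · exact h3 h'
          · exact h4 ((hf4 p).mpr h')
        · rintro ⟨h1, h2, h3⟩
          have hnR : p ∉ R := fun hx => h3 ((hR2mem p).mpr (Or.inl hx))
          have hnp : p ∉ pend := fun hx => h3 ((hR2mem p).mpr (Or.inr hx))
          exact ⟨⟨h1, h2, hnR⟩, fun hx => hnp ((hf4 p).mp hx)⟩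
      · rw [if_neg ht', inv.lval t' p]
        constructor
        · rintro ⟨h1, h2, h3⟩
          refine ⟨h1, h2, ?_⟩
          intro hx
          rcases (hR2mem p).mp hx with h' | h'
          · exact h3 h'
          · exact ht' (h2 ▸ (hpendOrig p h').symm ▸ rfl)
        · rintro ⟨h1, h2, h3⟩
          exact ⟨h1, h2, fun hx => h3 ((hR2mem p).mpr (Or.inl hx))⟩
  have hgval' : ∀ p, pvInB n m p → pvGet2 resA.1 ' ' p.1 p.2 =
      (if p ∈ R2 then '-' else pvOrig storage p.1 p.2) := by
    intro p hp
    rw [hf6 p hp]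
    by_cases hpd : p ∈ pend
    · rw [if_pos hpd, if_pos ((hR2mem p).mpr (Or.inr hpd))]
    · rw [if_neg hpd, inv.gval p hp]
      by_cases hpr : p ∈ R
      · rw [if_pos hpr, if_pos ((hR2mem p).mpr (Or.inl hpr))]
      · rw [if_neg hpr, if_neg (fun hx => by
          rcases (hR2mem p).mp hx with h | h
          · exact hpr h
          · exact hpd h)]
  have hbaseEmp : ∀ p, p ∈ acc2 → pvEmptyAt storage R2 p := by
    intro p hp
    rcases (hacc2mem p).mp hp with h | h
    · exact hEmptyMono p (inv.Aemp p h)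
    · exact Or.inl ((hR2mem p).mpr (Or.inr ((hseeds_mem p).mp h).1))
  have hFemp : ∀ p ∈ F, pvEmptyAt storage R2 p := fun p hp =>
    (pvReach_props hacc2in hbaseEmp p ((hFmem p).mp hp)).2
  have hFcl : pvClosed n m storage R2 (fun p => p ∈ F) := by
    intro p hp q hadj hin hemp
    exact (hFmem q).mpr (pvReach.step ((hFmem p).mp hp) hadj hin hemp)
  exact {
    glen := by rw [hf1]; exact inv.glen
    grow := fun r hr => by rw [hf2 r]; exact inv.grow r hr
    gval := hgval'
    lval := hloc'
    rem := hrem'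
    alen := hAlen
    arow := hArow
    aval := fun p hp => (hAmem p hp).trans (hFmem p).symm
    Rnd := hR2nd
    Rin := hR2in
    And := hFnd
    Ain := hFin
    Aemp := hFemp
    Acl := hFcl }

lemma pvInit_inv {storage : List String} :
    pvInv (storage.length : Int) ((storage.headD "").toList.length : Int) storage
      (storage.map String.toList,
        pvBuildLoc (storage.map String.toList) (storage.length : Int)
          ((storage.headD "").toList.length : Int),
        (storage.length : Int) * ((storage.headD "").toList.length : Int),
        List.replicate (storage.length : Int).toNat
          (List.replicate ((storage.headD "").toList.length : Int).toNat false))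
      (PySem.Set.empty, PySem.Set.empty) := by
  constructor
  · simp
  · intro r hr
    rw [pvRow_map_toList]
  · intro p hp
    rw [if_neg (by simp [PySem.Set.empty])]
    exact pvGet2_map_toList storage p.1 p.2
  · intro t p
    rw [pvBuildLoc_getD t p]
    simp [PySem.Set.empty]
  · simp [PySem.Set.empty]
  · simp
  · intro r hr
    rw [List.getD_eq_getElem?_getD, List.getElem?_eq_getElem (by simpa using hr),
      List.getElem_replicate]
    simp
  · intro p hp
    rw [pvGet2_replicate_false]
    simp [PySem.Set.empty]
  · simp [PySem.Set.empty]
  · intro p hp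
    simp [PySem.Set.empty] at hp
  · simp [PySem.Set.empty]
  · intro p hp
    simp [PySem.Set.empty] at hp
  · intro p hp
    simp [PySem.Set.empty] at hp
  · intro p hp q _ _ _
    simp [PySem.Set.empty] at hp

-- ===== VERDICT (by name: the statement is the Claim_ definition above) =====
theorem solution_spec : Claim_equal_solution := by
  intro storage requests _hdom hpre
  obtain ⟨hne, hrow, hreqs⟩ := hpre
  unfold Spec_solution solution solution_alt
  set n : Int := (storage.length : Int) with hn
  set m : Int := ((storage.headD "").toList.length : Int) with hm
  have hmrow : ∀ r : Nat, r < n.toNat → m.toNat ≤ (storage.getD r "").toList.length := by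
    intro r hr
    have hrlt : r < storage.length := by
      rw [hn] at hr
      simpa using hr
    have hmem : storage.getD r "" ∈ storage := by
      rw [List.getD_eq_getElem?_getD, List.getElem?_eq_getElem hrlt]
      exact List.getElem_mem _
    have hle := hrow _ hmem
    rw [hm]
    simpa using hle
  clear _hdom hreqs hne hrow
  suffices h : ∀ stA stB, pvInv n m storage stA stB →
      (requests.foldl (pvStepA n m) stA).2.2.1 =
        n * m - ((requests.foldl (pvStepB n m storage) stB).1.length : Int) by
    exact h _ _ pvInit_inv
  intro stA stB hinv
  induction requests generalizing stA stB with
  | nil => simpa using hinv.rem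
  | cons req rest ih =>
    simp only [List.foldl_cons]
    exact ih _ _ (pvStep_inv req hmrow hinv)
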